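-- pv_equiv track=rewrite | github.com/DuyHaKhuong/leetcode | Leetcode/power-grid-maintenance.py | processQueriesV1
-- ===== SOURCE A (Python) =====
-- from typing import List
-- from collections import defaultdict, deque
--
-- def processQueriesV1(c: int, connections: List[List[int]], queries: List[List[int]]) -> List[int]:
--     graph = defaultdict(set)
--     for u, v in connections:
--         graph[u].add(v)
--         graph[v].add(u)
--
--     def bfs(node):
--         components = set([node])
--         queue = deque([node])
--         while queue:
--             u = queue.popleft()
--             neighbors = graph[u]
--             for v in neighbors:
--                 if v in components:
--                     continue
--                 components.add(v)
--                 queue.append(v)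
--         return sorted(components, reverse=True)
--
--     grid_map = [None] * (c + 1)
--     for node in range(1, c + 1):
--         if grid_map[node] is not None:
--             continue
--         components = bfs(node)
--         for u in components:
--             grid_map[u] = components
--
--
--     status = [True] * (c + 2)
--     results = []
--     for action, node in queries:
--         if action == 2:
--             status[node] = False
--             components = grid_map[node]
--             while components and status[components[-1]] == False:
--                 components.pop()
--         # action == 1: maintenance check
--         elif status[node]:
--             results.append(node)
--         else:
--             if not grid_map[node]:
--                 results.append(-1)
--             else:
--                 results.append(grid_map[node][-1])
--     return results
-- ===== SOURCE B (Python) =====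
-- from typing import List
--
-- def processQueriesV1(c: int, connections: List[List[int]], queries: List[List[int]]) -> List[int]:
--     # union-find over the connections (no traversal, no sorting)
--     parent = {}
--
--     def find(x):
--         while x in parent:
--             x = parent[x]
--         return x
--
--     for u, v in connections:
--         ru, rv = find(u), find(v)
--         if ru != rv:
--             parent[ru] = rv
--
--     # per component root: the set of its currently-online stations in 0..c
--     alive = {}
--     for x in range(0, c + 1):
--         alive.setdefault(find(x), set()).add(x)
--
--     offline = set()
--     res = []
--     for a, n in queries:
--         if a == 2:
--             offline.add(n)
--             alive[find(n)].discard(n)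
--         elif n not in offline:
--             res.append(n)
--         else:
--             s = alive[find(n)]
--             res.append(min(s) if s else -1)
--     return res
-- ===== Notes on version B (the rewrite author's own statement) =====
-- stated objective: alternative
-- what changed: Components are found with union-find over the connection list (no graph traversal, no sorting), and queries are answered from per-root sets of currently-online stations whose minimum is computed on demand, instead of A's descending-sorted shared component lists eagerly popped from the back at every deactivation.
-- outside the precondition, e.g. on processQueriesV1(4, [], [[2, -2], [2, 2], [2, 4], [1, -2], [1, 4]]): A returns [3, -1], B raises KeyError; on processQueriesV1(3, [[1, -2], [0, 4]], [[2, 2], [2, 1], [1, 1]]): A returns [-2], B returns [-1]; on processQueriesV1(1, [[1, 5]], []): A raises IndexError, B returns []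
import Mathlib
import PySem

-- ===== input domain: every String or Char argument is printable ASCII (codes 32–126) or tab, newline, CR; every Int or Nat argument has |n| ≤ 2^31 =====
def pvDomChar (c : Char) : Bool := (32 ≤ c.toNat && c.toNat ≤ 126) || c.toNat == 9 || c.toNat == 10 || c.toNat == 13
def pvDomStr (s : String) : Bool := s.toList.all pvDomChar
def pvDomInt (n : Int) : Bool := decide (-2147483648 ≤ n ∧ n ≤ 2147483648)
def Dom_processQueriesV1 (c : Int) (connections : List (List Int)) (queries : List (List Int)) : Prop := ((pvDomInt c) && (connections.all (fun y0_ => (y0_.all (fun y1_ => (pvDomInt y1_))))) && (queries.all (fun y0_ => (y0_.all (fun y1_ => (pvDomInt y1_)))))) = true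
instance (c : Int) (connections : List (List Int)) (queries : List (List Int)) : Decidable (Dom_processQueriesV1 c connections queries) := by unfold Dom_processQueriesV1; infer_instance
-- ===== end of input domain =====

-- B finds components with union-find over the connection list (no graph traversal, no sorting) and
-- answers queries from per-root sets of currently-online stations whose minimum is computed on
-- demand, instead of A's descending-sorted shared component lists popped at every deactivation
-- (objective: alternative).

-- ===== PORT A =====
-- graph = defaultdict(set); for u, v in connections: graph[u].add(v); graph[v].add(u)
def pvGraphA (connections : List (List Int)) : PySem.Dict Int (PySem.Set Int) :=
  connections.foldl (fun g row =>
    match row with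
    | [u, v] =>
        let g1 := g.insert u (PySem.Set.add (g.getD u PySem.Set.empty) v)
        g1.insert v (PySem.Set.add (g1.getD v PySem.Set.empty) u)
    | _ => g) PySem.Dict.empty

-- body of A's BFS while-loop for one dequeued u: scan neighbours, add unseen ones to the set and queue
def pvBfsStep (g : PySem.Dict Int (PySem.Set Int)) (st : PySem.Set Int × List Int) (u : Int) :
    PySem.Set Int × List Int :=
  (g.getD u PySem.Set.empty).foldl
    (fun st v => if v ∈ st.1 then st else (PySem.Set.add st.1 v, st.2 ++ [v])) st

-- 'while queue: u = queue.popleft(); …' — fuel-bounded; inside Pre_ the fuel passed is sufficient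
def pvBfsLoop (g : PySem.Dict Int (PySem.Set Int)) : Nat → PySem.Set Int × List Int → PySem.Set Int
  | 0, st => st.1
  | _ + 1, (comp, []) => comp
  | fuel + 1, (comp, u :: rest) => pvBfsLoop g fuel (pvBfsStep g (comp, rest) u)

-- bfs(node): return sorted(components, reverse=True)
def pvBfs (g : PySem.Dict Int (PySem.Set Int)) (fuel : Nat) (node : Int) : List Int :=
  PySem.List.sorted (pvBfsLoop g fuel (PySem.Set.add PySem.Set.empty node, [node])) (fun x => x) true

-- grid_map holds ALIASED Python list objects; modelled as a pool of lists (st.1) plus, per node, the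
-- index of its shared list in the pool (st.2); 'grid_map[node] is None' = node missing from the dict
def pvFA (conns : List (List Int)) (st : List (List Int) × PySem.Dict Int Nat) (node : Int) :
    List (List Int) × PySem.Dict Int Nat :=
  if (st.2.get? node).isSome then st
  else
    let comp := pvBfs (pvGraphA conns) (2 + 2 * conns.length) node
    (st.1 ++ [comp], comp.foldl (fun gm u => gm.insert u st.1.length) st.2)

def pvAssignA (conns : List (List Int)) (c : Int) :
    List (List Int) × PySem.Dict Int Nat :=
  (PySem.List.pyRange 1 (c + 1) 1).foldl (pvFA conns) ([], PySem.Dict.empty)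

-- 'while components and status[components[-1]] == False: components.pop()' (fuel = list length)
def pvPopLoop (status : Int → Bool) : Nat → List Int → List Int
  | 0, l => l
  | fuel + 1, l =>
      match l.getLast? with
      | none => l
      | some x => if status x then l else pvPopLoop status fuel l.dropLast

-- one iteration of A's query loop; status is the status array as a total function (indexed only at
-- nodes 0..c inside Pre_); state = (pool of shared lists, status, results)
def pvStepA (gm : PySem.Dict Int Nat)
    (st : List (List Int) × (Int → Bool) × List Int) (q : List Int) :
    List (List Int) × (Int → Bool) × List Int :=
  match q with
  | [a, n] =>
      let pool := st.1; let status := st.2.1; let res := st.2.2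
      if a == 2 then
        let status' := fun x => if x == n then false else status x
        match gm.get? n with
        | some i =>
            let l := pool.getD i []
            (pool.set i (pvPopLoop status' l.length l), status', res)
        | none => (pool, status', res)
      else if status n then (pool, status, res ++ [n])
      else
        match gm.get? n with
        | none => (pool, status, res ++ [-1])
        | some i =>
            let l := pool.getD i []
            if l.isEmpty then (pool, status, res ++ [-1])
            else (pool, status, res ++ [PySem.List.pyGetD l (-1) 0])
  | _ => st

def processQueriesV1 (c : Int) (connections : List (List Int)) (queries : List (List Int)) : List Int :=
  let pg := pvAssignA connections c
  (queries.foldl (pvStepA pg.2) (pg.1, (fun _ => true), [])).2.2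

-- ===== PORT B =====
-- find(x): 'while x in parent: x = parent[x]; return x' — fuel-bounded; the fuel passed by the
-- callers below (number of connections) always suffices, since each union adds one fresh key
def pvFind (parent : PySem.Dict Int Int) : Nat → Int → Int
  | 0, x => x
  | f + 1, x =>
      match parent.get? x with
      | none => x
      | some y => pvFind parent f y

-- one union step: ru, rv = find(u), find(v); if ru != rv: parent[ru] = rv
def pvUFStep (fuel : Nat) (p : PySem.Dict Int Int) (row : List Int) : PySem.Dict Int Int :=
  match row with
  | [u, v] =>
      let ru := pvFind p fuel u
      let rv := pvFind p fuel v
      if ru == rv then p else p.insert ru rv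
  | _ => p

def pvUF (connections : List (List Int)) : PySem.Dict Int Int :=
  connections.foldl (pvUFStep connections.length) PySem.Dict.empty

-- for x in range(0, c+1): alive.setdefault(find(x), set()).add(x)
def pvAliveInit (parent : PySem.Dict Int Int) (fuel : Nat) (c : Int) :
    PySem.Dict Int (PySem.Set Int) :=
  (PySem.List.pyRange 0 (c + 1) 1).foldl (fun d x =>
    let r := pvFind parent fuel x
    d.insert r (PySem.Set.add (d.getD r PySem.Set.empty) x)) PySem.Dict.empty

-- one iteration of B's query loop; state = (offline set, alive dict, results);
-- 'alive[find(n)]' is ported as getD (the key exists for every query node Pre_ allows)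
def pvStepBQ (parent : PySem.Dict Int Int) (fuel : Nat)
    (st : PySem.Set Int × PySem.Dict Int (PySem.Set Int) × List Int) (q : List Int) :
    PySem.Set Int × PySem.Dict Int (PySem.Set Int) × List Int :=
  match q with
  | [a, n] =>
      let offline := st.1; let alive := st.2.1; let res := st.2.2
      if a == 2 then
        let r := pvFind parent fuel n
        (PySem.Set.add offline n,
         alive.insert r (PySem.Set.discard (alive.getD r PySem.Set.empty) n), res)
      else if !(PySem.Set.contains offline n) then (offline, alive, res ++ [n])
      else
        let s := alive.getD (pvFind parent fuel n) PySem.Set.empty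
        (offline, alive,
         res ++ [if s.isEmpty then -1 else (PySem.List.min? s (fun x => x)).getD (-1)])
  | _ => st

def processQueriesV1_alt (c : Int) (connections : List (List Int)) (queries : List (List Int)) : List Int :=
  let parent := pvUF connections
  let alive := pvAliveInit parent connections.length c
  (queries.foldl (pvStepBQ parent connections.length) (PySem.Set.empty, alive, [])).2.2

-- ===== PRECONDITION & SPEC =====
-- row joins station 0 to an id outside 0..c / to an id in 1..c (used by Pre_ below)
def pvZeroOut (c : Int) (row : List Int) : Prop :=
  (row.getD 0 0 = 0 ∧ ¬(0 ≤ row.getD 1 0 ∧ row.getD 1 0 ≤ c)) ∨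
  (row.getD 1 0 = 0 ∧ ¬(0 ≤ row.getD 0 0 ∧ row.getD 0 0 ≤ c))
def pvZeroIn (c : Int) (row : List Int) : Prop :=
  (row.getD 0 0 = 0 ∧ 1 ≤ row.getD 1 0 ∧ row.getD 1 0 ≤ c) ∨
  (row.getD 1 0 = 0 ∧ 1 ≤ row.getD 0 0 ∧ row.getD 0 0 ≤ c)

-- Pre_ excludes exactly the inputs where A's Python list indexing stops being a station lookup:
-- rows must be pairs (else A raises ValueError); a connection touching a station in 1..c must stay
-- inside 0..c, and station 0 may not bridge 1..c to outside ids (A would then alias the outside id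
-- into the grid_map array by Python's negative-index wraparound or raise IndexError; edges that
-- never reach a scanned station are harmless and stay inside Pre_); deactivation ids lie in 0..c
-- (beyond the arrays A raises IndexError, on negative ids it flips wrapped-around slots); other
-- query ids may leave 0..c only where A's wrapped status slot is never deactivated (A then answers
-- the id itself, as B does) — see the claim's cites for excluded examples.
def pvPreMain (c : Int) (connections : List (List Int)) (queries : List (List Int)) : Prop :=
  (∀ row ∈ connections, row.length = 2 ∧
     (((1 ≤ row.getD 0 0 ∧ row.getD 0 0 ≤ c) ∨ (1 ≤ row.getD 1 0 ∧ row.getD 1 0 ≤ c)) →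
       ((0 ≤ row.getD 0 0 ∧ row.getD 0 0 ≤ c) ∧ (0 ≤ row.getD 1 0 ∧ row.getD 1 0 ≤ c)))) ∧
  ¬((∃ row ∈ connections, pvZeroOut c row) ∧ (∃ row ∈ connections, pvZeroIn c row)) ∧
  (∀ q ∈ queries, q.length = 2 ∧
     (q.getD 0 0 = 2 → 0 ≤ q.getD 1 0 ∧ q.getD 1 0 ≤ c) ∧
     (q.getD 0 0 ≠ 2 → ((0 ≤ q.getD 1 0 ∧ q.getD 1 0 ≤ c) ∨
        (-(c + 2) ≤ q.getD 1 0 ∧ q.getD 1 0 ≤ c + 1 ∧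
          ∀ q' ∈ queries, q'.getD 0 0 = 2 →
            q'.getD 1 0 ≠ (if q.getD 1 0 < 0 then q.getD 1 0 + (c + 2) else q.getD 1 0)))))
-- 'frozen' alternative: every connection endpoint is a valid (possibly wrapped) array index and no
-- query's wrapped status slot is ever deactivated, so every non-deactivation query answers its own
-- id in both programs, whatever the connections alias
def pvPreFrozen (c : Int) (connections : List (List Int)) (queries : List (List Int)) : Prop :=
  (∀ row ∈ connections, row.length = 2 ∧
     (-(c + 1) ≤ row.getD 0 0 ∧ row.getD 0 0 ≤ c) ∧ (-(c + 1) ≤ row.getD 1 0 ∧ row.getD 1 0 ≤ c)) ∧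
  (∀ q ∈ queries, q.length = 2 ∧
     ((q.getD 0 0 = 2 ∧ 0 ≤ q.getD 1 0 ∧ q.getD 1 0 ≤ c) ∨
      (q.getD 0 0 ≠ 2 ∧ -(c + 2) ≤ q.getD 1 0 ∧ q.getD 1 0 ≤ c + 1 ∧
        ∀ q' ∈ queries, q'.getD 0 0 = 2 →
          q'.getD 1 0 ≠ (if q.getD 1 0 < 0 then q.getD 1 0 + (c + 2) else q.getD 1 0))))

def Pre_processQueriesV1 (c : Int) (connections : List (List Int)) (queries : List (List Int)) : Prop :=
  pvPreMain c connections queries ∨ pvPreFrozen c connections queries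
instance (c : Int) (connections : List (List Int)) (queries : List (List Int)) :
    Decidable (Pre_processQueriesV1 c connections queries) := by
  unfold Pre_processQueriesV1 pvPreMain pvPreFrozen pvZeroOut pvZeroIn; infer_instance

def pvWitness_processQueriesV1 : Int × List (List Int) × List (List Int) :=
  (3, [[1, 2], [7, 9]], [[1, 3], [2, 1], [1, 1], [2, 2], [1, 2], [1, 0]])

def Spec_processQueriesV1 (c : Int) (connections : List (List Int)) (queries : List (List Int)) (out : List Int) : Prop := out = processQueriesV1_alt c connections queries
instance (c : Int) (connections : List (List Int)) (queries : List (List Int)) (out : List Int) : Decidable (Spec_processQueriesV1 c connections queries out) := by unfold Spec_processQueriesV1; infer_instance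

-- ===== CLAIM (what is proved, stated in full; the proofs are below) =====
def Claim_equal_processQueriesV1 : Prop := ∀ (c : Int) (connections : List (List Int)) (queries : List (List Int)), Dom_processQueriesV1 c connections queries → Pre_processQueriesV1 c connections queries → Spec_processQueriesV1 c connections queries (processQueriesV1 c connections queries)

-- ===== LEMMAS AND PROOFS =====

-- the edge relation of `connections`
def pvE (conns : List (List Int)) (u v : Int) : Prop := [u, v] ∈ conns ∨ [v, u] ∈ conns

-- reachability along edges
inductive pvReach (conns : List (List Int)) (s : Int) : Int → Prop
  | refl : pvReach conns s s
  | step {a b : Int} : pvReach conns s a → pvE conns a b → pvReach conns s b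

lemma pvE_symm {conns : List (List Int)} {u v : Int} (h : pvE conns u v) : pvE conns v u :=
  h.elim Or.inr Or.inl

lemma pvReach_trans {conns : List (List Int)} {s a b : Int}
    (h1 : pvReach conns s a) (h2 : pvReach conns a b) : pvReach conns s b := by
  induction h2 with
  | refl => exact h1
  | step _ e ih => exact ih.step e

lemma pvReach_symm {conns : List (List Int)} {s a : Int}
    (h : pvReach conns s a) : pvReach conns a s := by
  induction h with
  | refl => exact pvReach.refl
  | step _ e ih => exact pvReach_trans (pvReach.refl.step (pvE_symm e)) ih

-- membership count of the still-unseen part of the universe U (termination measure for A's BFS)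
def pvCnt (U seen : List Int) : Nat := U.countP (fun x => decide (x ∉ seen))

lemma pvCnt_mono {U seen seen' : List Int} (h : ∀ x, x ∈ seen → x ∈ seen') :
    pvCnt U seen' ≤ pvCnt U seen := by
  unfold pvCnt
  exact List.countP_mono_left (fun x _ => by simp only [decide_eq_true_eq]; exact fun h2 hx => h2 (h x hx))

lemma pvCnt_snoc {U seen : List Int} {v : Int} (hv : v ∈ U) (hnv : v ∉ seen) :
    pvCnt U (seen ++ [v]) + 1 ≤ pvCnt U seen := by
  induction U with
  | nil => cases hv
  | cons u U ih =>
    unfold pvCnt at *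
    simp only [List.countP_cons]
    by_cases huv : u = v
    · subst huv
      have h1 : (decide (u ∉ seen ++ [u])) = false := by simp
      have h2 : (decide (u ∉ seen)) = true := by simpa using hnv
      rw [h1, h2]
      simp only [Bool.false_eq_true, reduceIte]
      have := pvCnt_mono (U := U) (seen := seen) (seen' := seen ++ [u])
        (fun x hx => List.mem_append.mpr (Or.inl hx))
      unfold pvCnt at this; omega
    · have hv' : v ∈ U := by
        rcases List.mem_cons.mp hv with h | h
        · exact absurd h.symm huv
        · exact h
      have heq : (decide (u ∉ seen ++ [v])) = (decide (u ∉ seen)) := by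
        simp only [List.mem_append, List.mem_singleton, huv, or_false]
      rw [heq]
      have := ih hv'
      omega

-- generic worklist loop; A's BFS loop is an instance of it
def pvLoop (f : PySem.Set Int × List Int → Int → PySem.Set Int × List Int) :
    Nat → PySem.Set Int × List Int → PySem.Set Int
  | 0, st => st.1
  | _ + 1, (seen, []) => seen
  | fuel + 1, (seen, u :: rest) => pvLoop f fuel (f (seen, rest) u)

lemma pvBfsLoop_eq_pvLoop (g : PySem.Dict Int (PySem.Set Int)) :
    ∀ fuel st, pvBfsLoop g fuel st = pvLoop (pvBfsStep g) fuel st := by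
  intro fuel
  induction fuel with
  | zero => intro st; rfl
  | succ n ih =>
    rintro ⟨seen, _ | ⟨u, rest⟩⟩
    · rfl
    · simpa [pvBfsLoop, pvLoop] using ih _

lemma mem_graphA_aux (conns : List (List Int)) :
    ∀ (g0 : PySem.Dict Int (PySem.Set Int)) (u v : Int),
      (v ∈ (conns.foldl (fun g row =>
        match row with
        | [a, b] =>
            let g1 := g.insert a (PySem.Set.add (g.getD a PySem.Set.empty) b)
            g1.insert b (PySem.Set.add (g1.getD b PySem.Set.empty) a)
        | _ => g) g0).getD u PySem.Set.empty)
      ↔ (v ∈ g0.getD u PySem.Set.empty ∨ pvE conns u v) := by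
  induction conns with
  | nil => intro g0 u v; simp [pvE]
  | cons row rest ih =>
    intro g0 u v
    rw [List.foldl_cons, ih]
    have hE : pvE (row :: rest) u v ↔ ((row = [u, v] ∨ row = [v, u]) ∨ pvE rest u v) := by
      simp only [pvE, List.mem_cons]
      constructor
      · rintro (h | h)
        · rcases h with h | h
          · exact Or.inl (Or.inl h.symm)
          · exact Or.inr (Or.inl h)
        · rcases h with h | h
          · exact Or.inl (Or.inr h.symm)
          · exact Or.inr (Or.inr h)
      · rintro ((h | h) | (h | h))
        · exact Or.inl (Or.inl h.symm)
        · exact Or.inr (Or.inl h.symm)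
        · exact Or.inl (Or.inr h)
        · exact Or.inr (Or.inr h)
    rw [hE]
    rcases row with _ | ⟨a, _ | ⟨b, _ | ⟨x, t⟩⟩⟩
    · simp
    · simp
    · simp only []
      simp only [PySem.Dict.getD_insert, List.cons.injEq, and_true]
      by_cases h1 : u = b <;> by_cases h2 : u = a <;> by_cases h3 : b = a <;>
        simp_all <;> tauto
    · simp

lemma mem_graphA (conns : List (List Int)) (u v : Int) :
    v ∈ (pvGraphA conns).getD u PySem.Set.empty ↔ pvE conns u v := by
  have h := mem_graphA_aux conns PySem.Dict.empty u v
  simpa [pvGraphA] using h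

-- effect of the inner neighbour fold of the BFS
lemma pvFoldAdd_spec (U : List Int) :
    ∀ (nbrs seen work : List Int), (∀ v ∈ nbrs, v ∈ U) →
      ((∀ x, x ∈ (nbrs.foldl (fun st v =>
          if v ∈ st.1 then st else (PySem.Set.add st.1 v, st.2 ++ [v])) (seen, work)).1
        ↔ (x ∈ seen ∨ x ∈ nbrs)) ∧
      (∀ x, x ∈ (nbrs.foldl (fun st v =>
          if v ∈ st.1 then st else (PySem.Set.add st.1 v, st.2 ++ [v])) (seen, work)).2
        ↔ (x ∈ work ∨ (x ∈ nbrs ∧ x ∉ seen))) ∧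
      ((nbrs.foldl (fun st v =>
          if v ∈ st.1 then st else (PySem.Set.add st.1 v, st.2 ++ [v])) (seen, work)).2.length
        + pvCnt U (nbrs.foldl (fun st v =>
          if v ∈ st.1 then st else (PySem.Set.add st.1 v, st.2 ++ [v])) (seen, work)).1
        ≤ work.length + pvCnt U seen)) := by
  intro nbrs
  induction nbrs with
  | nil => intro seen work _; refine ⟨by simp, by simp, le_refl _⟩
  | cons v t ih =>
    intro seen work hU
    have hvU : v ∈ U := hU v (List.mem_cons_self ..)
    have hU' : ∀ x ∈ t, x ∈ U := fun x hx => hU x (List.mem_cons_of_mem _ hx)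
    rw [List.foldl_cons]
    by_cases hv : v ∈ seen
    · rw [if_pos hv]
      obtain ⟨m1, m2, m3⟩ := ih seen work hU'
      refine ⟨fun x => ?_, fun x => ?_, m3⟩
      · rw [m1]
        constructor
        · rintro (h | h)
          · exact Or.inl h
          · exact Or.inr (List.mem_cons_of_mem _ h)
        · rintro (h | h)
          · exact Or.inl h
          · rcases List.mem_cons.mp h with rfl | h
            · exact Or.inl hv
            · exact Or.inr h
      · rw [m2]
        constructor
        · rintro (h | ⟨h, h2⟩)
          · exact Or.inl h
          · exact Or.inr ⟨List.mem_cons_of_mem _ h, h2⟩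
        · rintro (h | ⟨h, h2⟩)
          · exact Or.inl h
          · rcases List.mem_cons.mp h with rfl | h
            · exact absurd hv h2
            · exact Or.inr ⟨h, h2⟩
    · rw [if_neg hv, PySem.Set.add_of_not_mem hv]
      obtain ⟨m1, m2, m3⟩ := ih (seen ++ [v]) (work ++ [v]) hU'
      refine ⟨fun x => ?_, fun x => ?_, ?_⟩
      · rw [m1]
        simp only [List.mem_append, List.mem_cons, List.not_mem_nil, or_false]
        tauto
      · rw [m2]
        simp only [List.mem_append, List.mem_cons, List.not_mem_nil, or_false]
        constructor
        · rintro ((h | rfl) | ⟨h, h2⟩)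
          · exact Or.inl h
          · exact Or.inr ⟨Or.inl rfl, hv⟩
          · exact Or.inr ⟨Or.inr h, fun hs => h2 (Or.inl hs)⟩
        · rintro (h | ⟨(rfl | h), h2⟩)
          · exact Or.inl (Or.inl h)
          · exact Or.inl (Or.inr rfl)
          · by_cases hxv : x = v
            · exact Or.inl (Or.inr hxv)
            · exact Or.inr ⟨h, by simp [h2, hxv]⟩
      · have hsnoc := pvCnt_snoc hvU hv
        have hl : (work ++ [v]).length = work.length + 1 := by simp
        refine le_trans m3 ?_
        omega

-- a Nodup preservation twin for the same fold
lemma pvFoldAdd_nodup :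
    ∀ (nbrs seen work : List Int), seen.Nodup →
      (nbrs.foldl (fun st v =>
        if v ∈ st.1 then st else (PySem.Set.add st.1 v, st.2 ++ [v])) (seen, work)).1.Nodup := by
  intro nbrs
  induction nbrs with
  | nil => intro seen work h; exact h
  | cons v t ih =>
    intro seen work h
    rw [List.foldl_cons]
    by_cases hv : v ∈ seen
    · rw [if_pos hv]; exact ih seen work h
    · rw [if_neg hv, PySem.Set.add_of_not_mem hv]
      refine ih _ _ ?_
      rw [List.nodup_append]
      refine ⟨h, List.nodup_singleton v, ?_⟩
      intro a ha b hb
      rcases List.mem_singleton.mp hb with rfl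
      exact fun hab => hv (hab ▸ ha)

-- if seen contains s and is closed under edges, it contains everything reachable from s
lemma pvReach_subset {conns : List (List Int)} {s x : Int} {seen : List Int}
    (hs : s ∈ seen) (hcl : ∀ u ∈ seen, ∀ v, pvE conns u v → v ∈ seen)
    (h : pvReach conns s x) : x ∈ seen := by
  induction h with
  | refl => exact hs
  | step _ e ih => exact hcl _ ih _ e

-- the generic loop visits exactly the reachable set (and keeps it duplicate-free)
lemma pvLoop_mem (conns : List (List Int)) (U : List Int) (s : Int)
    (f : PySem.Set Int × List Int → Int → PySem.Set Int × List Int)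
    (hf1 : ∀ seen work u, ∀ x, x ∈ (f (seen, work) u).1 ↔ (x ∈ seen ∨ pvE conns u x))
    (hf2 : ∀ seen work u, ∀ x, x ∈ (f (seen, work) u).2 ↔ (x ∈ work ∨ (pvE conns u x ∧ x ∉ seen)))
    (hf3 : ∀ seen work u, (f (seen, work) u).2.length + pvCnt U (f (seen, work) u).1
            ≤ work.length + pvCnt U seen)
    (hf4 : ∀ seen work u, seen.Nodup → (f (seen, work) u).1.Nodup) :
    ∀ fuel (seen work : List Int),
      (∀ x ∈ work, x ∈ seen) → s ∈ seen → seen.Nodup →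
      (∀ x ∈ seen, pvReach conns s x) →
      (∀ u ∈ seen, u ∉ work → ∀ v, pvE conns u v → v ∈ seen) →
      work.length + pvCnt U seen ≤ fuel →
      ((∀ x, x ∈ pvLoop f fuel (seen, work) ↔ pvReach conns s x) ∧
        (pvLoop f fuel (seen, work)).Nodup) := by
  intro fuel
  induction fuel with
  | zero =>
    intro seen work hws hs hnd hre hcl hfuel
    have hw : work = [] := by
      have := List.length_eq_zero_iff.mp (by omega : work.length = 0)
      exact this
    subst hw
    exact ⟨fun x => ⟨fun h => hre x h,
      fun h => pvReach_subset hs (fun u hu v e => hcl u hu (by simp) v e) h⟩, hnd⟩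
  | succ n ih =>
    intro seen work hws hs hnd hre hcl hfuel
    match work with
    | [] =>
      exact ⟨fun x => ⟨fun h => hre x h,
        fun h => pvReach_subset hs (fun u hu v e => hcl u hu (by simp) v e) h⟩, hnd⟩
    | u :: rest =>
      show (∀ x, x ∈ pvLoop f n (f (seen, rest) u) ↔ pvReach conns s x) ∧ _
      have hu : u ∈ seen := hws u (List.mem_cons_self ..)
      have h1 := hf1 seen rest u
      have h2 := hf2 seen rest u
      have h3 := hf3 seen rest u
      have hcast : f (seen, rest) u = ((f (seen, rest) u).1, (f (seen, rest) u).2) := rfl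
      rw [hcast]
      apply ih
      · intro x hx
        rcases (h2 x).mp hx with h | ⟨e, _⟩
        · exact (h1 x).mpr (Or.inl (hws x (List.mem_cons_of_mem _ h)))
        · exact (h1 x).mpr (Or.inr e)
      · exact (h1 s).mpr (Or.inl hs)
      · exact hf4 seen rest u hnd
      · intro x hx
        rcases (h1 x).mp hx with h | e
        · exact hre x h
        · exact (hre u hu).step e
      · intro w hw hnw v e
        rcases (h1 w).mp hw with hwseen | ew
        · by_cases hwu : w = u
          · subst hwu; exact (h1 v).mpr (Or.inr e)
          · have : w ∉ rest := fun hr => hnw ((h2 w).mpr (Or.inl hr))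
            have : w ∉ u :: rest := by simp [hwu, this]
            exact (h1 v).mpr (Or.inl (hcl w hwseen this v e))
        · by_cases hwseen : w ∈ seen
          · by_cases hwu : w = u
            · subst hwu; exact (h1 v).mpr (Or.inr e)
            · have : w ∉ rest := fun hr => hnw ((h2 w).mpr (Or.inl hr))
              have : w ∉ u :: rest := by simp [hwu, this]
              exact (h1 v).mpr (Or.inl (hcl w hwseen this v e))
          · exact absurd ((h2 w).mpr (Or.inr ⟨ew, hwseen⟩)) hnw
      · have : (u :: rest).length = rest.length + 1 := rfl
        omega

def pvUniv (conns : List (List Int)) (s : Int) : List Int := s :: conns.flatten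

lemma pvE_mem_univ {conns : List (List Int)} {u v : Int} (s : Int) (h : pvE conns u v) :
    v ∈ pvUniv conns s := by
  rcases h with h | h
  · exact List.mem_cons_of_mem _ (List.mem_flatten.mpr ⟨[u, v], h, by simp⟩)
  · exact List.mem_cons_of_mem _ (List.mem_flatten.mpr ⟨[v, u], h, by simp⟩)

lemma pvUniv_len (conns : List (List Int)) (h2 : ∀ r ∈ conns, r.length = 2) (s : Int) :
    (pvUniv conns s).length = 1 + 2 * conns.length := by
  unfold pvUniv
  simp only [List.length_cons]
  have : conns.flatten.length = 2 * conns.length := by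
    induction conns with
    | nil => simp
    | cons r t ih =>
      simp only [List.flatten_cons, List.length_append, List.length_cons,
        h2 r (List.mem_cons_self ..), ih (fun x hx => h2 x (List.mem_cons_of_mem _ hx))]
      ring
  omega

lemma pvBfsLoop_members (conns : List (List Int)) (h2 : ∀ r ∈ conns, r.length = 2) (s : Int) :
    (∀ x, x ∈ pvBfsLoop (pvGraphA conns) (2 + 2 * conns.length)
        (PySem.Set.add PySem.Set.empty s, [s]) ↔ pvReach conns s x)
    ∧ (pvBfsLoop (pvGraphA conns) (2 + 2 * conns.length)
        (PySem.Set.add PySem.Set.empty s, [s])).Nodup := by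
  have hseed : PySem.Set.add PySem.Set.empty s = [s] := rfl
  rw [pvBfsLoop_eq_pvLoop, hseed]
  have hspec := pvFoldAdd_spec (pvUniv conns s)
  have hstep : ∀ seen work u, pvBfsStep (pvGraphA conns) (seen, work) u =
      ((pvGraphA conns).getD u PySem.Set.empty).foldl
        (fun st v => if v ∈ st.1 then st else (PySem.Set.add st.1 v, st.2 ++ [v])) (seen, work) :=
    fun _ _ _ => rfl
  have hnbr : ∀ u : Int, ∀ v ∈ (pvGraphA conns).getD u PySem.Set.empty, v ∈ pvUniv conns s :=
    fun u v hv => pvE_mem_univ s ((mem_graphA conns u v).mp hv)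
  refine pvLoop_mem conns (pvUniv conns s) s _ ?_ ?_ ?_ ?_ _ [s] [s] (by simp) (by simp)
    (List.nodup_singleton s) ?_ ?_ ?_
  · intro seen work u x
    rw [hstep]
    rw [(hspec _ seen work (hnbr u)).1 x, mem_graphA]
  · intro seen work u x
    rw [hstep]
    rw [(hspec _ seen work (hnbr u)).2.1 x, mem_graphA]
  · intro seen work u
    rw [hstep]
    exact (hspec _ seen work (hnbr u)).2.2
  · intro seen work u hnd
    rw [hstep]
    exact pvFoldAdd_nodup _ seen work hnd
  · intro x hx
    rcases List.mem_singleton.mp hx with rfl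
    exact pvReach.refl
  · intro u hu hnu v e
    exact absurd hu hnu
  · have hcnt : pvCnt (pvUniv conns s) [s] ≤ (pvUniv conns s).length := List.countP_le_length ..
    have := pvUniv_len conns h2 s
    simp only [List.length_singleton]
    omega

-- sorted(xs, reverse=True) is the reverse of sorted(ys) when xs and ys are the same finite set
lemma pvSorted_desc_eq_reverse (xs ys : List Int) (hx : xs.Nodup) (hy : ys.Nodup)
    (hmem : ∀ x, x ∈ xs ↔ x ∈ ys) :
    PySem.List.sorted xs (fun x => x) true
      = (PySem.List.sorted ys (fun x => x) false).reverse := by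
  have hperm : ys.Perm xs := (List.perm_ext_iff_of_nodup hy hx).mpr (fun a => (hmem a).symm)
  have hpasc : (PySem.List.sorted ys (fun x => x) false).Perm ys := PySem.List.sorted_perm ..
  have hnd : (PySem.List.sorted ys (fun x => x) false).Nodup := hpasc.nodup_iff.mpr hy
  have hple : (PySem.List.sorted ys (fun x => x) false).Pairwise (fun a b => a ≤ b) :=
    PySem.List.sorted_pairwise ys (fun x => x)
  have hplt : (PySem.List.sorted ys (fun x => x) false).Pairwise (fun a b => a < b) :=
    (hple.and hnd).imp (fun h => lt_of_le_of_ne h.1 h.2)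
  refine PySem.List.sorted_rev_eq_of_perm_of_pairwise_gt _ _ _ ?_ ?_
  · exact (List.reverse_perm _).trans (hpasc.trans hperm)
  · rw [List.pairwise_reverse]
    exact hplt

lemma pvFoldInsert_get? (v : Nat) :
    ∀ (ms : List Int) (d : PySem.Dict Int Nat) (x : Int),
      (ms.foldl (fun d u => d.insert u v) d).get? x
        = if x ∈ ms then some v else d.get? x := by
  intro ms
  induction ms with
  | nil => intro d x; simp
  | cons u t ih =>
    intro d x
    rw [List.foldl_cons, ih]
    by_cases hx : x ∈ t
    · simp [hx]
    · by_cases hxu : x = u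
      · subst hxu
        simp [hx, PySem.Dict.get?_insert_self]
      · simp [hx, hxu, PySem.Dict.get?_insert_of_ne d _ hxu]

-- invariant of A's component-assignment loop
def pvAInv (conns : List (List Int)) (c : Int) (pool : List (List Int))
    (gm : PySem.Dict Int Nat) : Prop :=
  (∀ x i, gm.get? x = some i → i < pool.length ∧ ∀ y, pvReach conns x y → gm.get? y = some i) ∧
  (∀ (i : Nat) (L : List Int), pool[i]? = some L →
    (∀ x, x ∈ L ↔ gm.get? x = some i) ∧ L.reverse.Pairwise (· < ·) ∧
    ∃ s, (1 ≤ s ∧ s ≤ c) ∧ ∀ x, x ∈ L ↔ pvReach conns s x)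

lemma pvA_step (conns : List (List Int)) (h2 : ∀ r ∈ conns, r.length = 2) (c : Int)
    (pool : List (List Int)) (gm : PySem.Dict Int Nat)
    (hinv : pvAInv conns c pool gm) (s : Int) (hsin : 1 ≤ s ∧ s ≤ c) :
    pvAInv conns c (pvFA conns (pool, gm) s).1 (pvFA conns (pool, gm) s).2
    ∧ (∀ x i, gm.get? x = some i → (pvFA conns (pool, gm) s).2.get? x = some i)
    ∧ ((pvFA conns (pool, gm) s).2.get? s).isSome := by
  obtain ⟨hC1, hC2⟩ := hinv
  by_cases hs : (gm.get? s).isSome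
  · unfold pvFA; rw [if_pos hs]; exact ⟨⟨hC1, hC2⟩, fun x i h => h, hs⟩
  · have hsn : gm.get? s = none := Option.not_isSome_iff_eq_none.mp hs
    obtain ⟨hbmem, hbnd⟩ := pvBfsLoop_members conns h2 s
    have hcompA : pvBfs (pvGraphA conns) (2 + 2 * conns.length) s
        = (PySem.List.sorted (pvBfsLoop (pvGraphA conns) (2 + 2 * conns.length)
            (PySem.Set.add PySem.Set.empty s, [s])) (fun x => x) false).reverse := by
      unfold pvBfs
      exact pvSorted_desc_eq_reverse _ _ hbnd hbnd (fun x => Iff.rfl)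
    set comp := pvBfs (pvGraphA conns) (2 + 2 * conns.length) s with hcompdef
    have hcmem : ∀ x, x ∈ comp ↔ pvReach conns s x := by
      intro x
      rw [hcompdef]
      unfold pvBfs
      rw [PySem.List.mem_sorted]
      exact hbmem x
    have hcrev : comp.reverse.Pairwise (· < ·) := by
      rw [hcompA, List.reverse_reverse]
      have hnd : (PySem.List.sorted (pvBfsLoop (pvGraphA conns) (2 + 2 * conns.length)
          (PySem.Set.add PySem.Set.empty s, [s])) (fun x => x) false).Nodup :=
        (PySem.List.sorted_perm ..).nodup_iff.mpr hbnd
      have hle := PySem.List.sorted_pairwise (pvBfsLoop (pvGraphA conns) (2 + 2 * conns.length)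
          (PySem.Set.add PySem.Set.empty s, [s])) (fun x => x)
      exact (hle.and hnd).imp (fun h => lt_of_le_of_ne h.1 h.2)
    have hfresh : ∀ x ∈ comp, gm.get? x = none := by
      intro x hx
      by_contra hne
      obtain ⟨i, hi⟩ := Option.ne_none_iff_exists'.mp hne
      have := (hC1 x i hi).2 s (pvReach_symm ((hcmem x).mp hx))
      rw [this] at hsn
      cases hsn
    unfold pvFA
    rw [if_neg hs]
    simp only []
    rw [← hcompdef]
    have hgm' : ∀ x, (comp.foldl (fun gm u => gm.insert u pool.length) gm).get? x
        = if x ∈ comp then some pool.length else gm.get? x :=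
      fun x => pvFoldInsert_get? pool.length comp gm x
    refine ⟨⟨?_, ?_⟩, ?_, ?_⟩
    · intro x i h
      rw [hgm' x] at h
      by_cases hx : x ∈ comp
      · rw [if_pos hx] at h
        cases h
        refine ⟨by simp, ?_⟩
        intro y hy
        have hsy : pvReach conns s y := pvReach_trans ((hcmem x).mp hx) hy
        rw [hgm' y, if_pos ((hcmem y).mpr hsy)]
      · rw [if_neg hx] at h
        obtain ⟨hlt, hcl⟩ := hC1 x i h
        refine ⟨by simp; omega, ?_⟩
        intro y hy
        have hgy := hcl y hy
        have hyn : y ∉ comp := by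
          intro hc
          rw [hfresh y hc] at hgy
          cases hgy
        rw [hgm' y, if_neg hyn]
        exact hgy
    · intro i L hL
      rcases lt_trichotomy i pool.length with hi | hi | hi
      · rw [List.getElem?_append_left hi] at hL
        obtain ⟨hm, hp, hs'⟩ := hC2 i L hL
        refine ⟨?_, hp, hs'⟩
        intro x
        rw [hgm' x]
        by_cases hx : x ∈ comp
        · rw [if_pos hx]
          constructor
          · intro hxL
            have := (hm x).mp hxL
            rw [hfresh x hx] at this
            cases this
          · intro h
            cases h
            omega
        · rw [if_neg hx]
          exact hm x
      · subst hi
        rw [List.getElem?_concat_length] at hL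
        cases hL
        refine ⟨?_, hcrev, ⟨s, hsin, hcmem⟩⟩
        intro x
        rw [hgm' x]
        by_cases hx : x ∈ comp
        · simp [hx]
        · rw [if_neg hx]
          constructor
          · intro h; exact absurd h hx
          · intro h
            have := (hC1 x _ h).1
            omega
      · rw [List.getElem?_eq_none (by simp; omega)] at hL
        cases hL
    · intro x i h
      have hxn : x ∉ comp := by
        intro hc
        rw [hfresh x hc] at h
        cases h
      rw [hgm' x, if_neg hxn]
      exact h
    · rw [hgm' s, if_pos ((hcmem s).mpr pvReach.refl)]
      simp

lemma pvA_ind (conns : List (List Int)) (h2 : ∀ r ∈ conns, r.length = 2) (c : Int) :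
    ∀ (L : List Int) (pool : List (List Int)) (gm : PySem.Dict Int Nat),
      (∀ s ∈ L, 1 ≤ s ∧ s ≤ c) →
      pvAInv conns c pool gm →
      pvAInv conns c (L.foldl (pvFA conns) (pool, gm)).1 (L.foldl (pvFA conns) (pool, gm)).2
      ∧ (∀ x i, gm.get? x = some i → ((L.foldl (pvFA conns) (pool, gm)).2.get? x) = some i)
      ∧ (∀ s ∈ L, ((L.foldl (pvFA conns) (pool, gm)).2.get? s).isSome) := by
  intro L
  induction L with
  | nil => intro pool gm _ hrel; exact ⟨hrel, fun x i h => h, by simp⟩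
  | cons a L ih =>
    intro pool gm hL hrel
    obtain ⟨hstep, hpres, hcov⟩ := pvA_step conns h2 c pool gm hrel a (hL a (List.mem_cons_self ..))
    rw [List.foldl_cons]
    have hcast : pvFA conns (pool, gm) a
        = ((pvFA conns (pool, gm) a).1, (pvFA conns (pool, gm) a).2) := rfl
    rw [hcast]
    obtain ⟨hrel', hpres', hcov'⟩ := ih _ _ (fun s hs => hL s (List.mem_cons_of_mem _ hs)) hstep
    refine ⟨hrel', ?_, ?_⟩
    · intro x i h
      exact hpres' x i (hpres x i h)
    · intro t ht
      rcases List.mem_cons.mp ht with rfl | ht'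
      · obtain ⟨i, hi⟩ := Option.isSome_iff_exists.mp hcov
        rw [hpres' t i hi]
        rfl
      · exact hcov' t ht'

lemma pvPopLoop_eq (p : Int → Bool) :
    ∀ fuel (l : List Int), l.length ≤ fuel →
      pvPopLoop p fuel l = (l.reverse.dropWhile (fun x => !p x)).reverse := by
  intro fuel
  induction fuel with
  | zero =>
    intro l h
    have hl : l = [] := List.length_eq_zero_iff.mp (by omega)
    subst hl; rfl
  | succ n ih =>
    intro l h
    rcases List.eq_nil_or_concat l with rfl | ⟨l', b, rfl⟩
    · rfl
    · rw [List.concat_eq_append] at *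
      show (match (l' ++ [b]).getLast? with
        | none => l' ++ [b]
        | some x => if p x then l' ++ [b] else pvPopLoop p n (l' ++ [b]).dropLast) = _
      rw [List.getLast?_concat]
      simp only [List.reverse_append, List.reverse_cons, List.reverse_nil, List.nil_append,
        List.cons_append, List.dropWhile_cons]
      by_cases hp : p b
      · simp only [hp, Bool.not_true, Bool.false_eq_true, if_false, if_true]
        simp
      · have hpb : p b = false := by simp [hp]
        rw [hpb]
        simp only [Bool.not_false, if_true, Bool.false_eq_true, if_false, List.dropLast_concat]
        rw [ih l' (by simp at h; omega)]

lemma pvHead?_dropWhile (p : Int → Bool) :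
    ∀ (l : List Int) (x : Int), (List.dropWhile p l).head? = some x → p x = false := by
  intro l
  induction l with
  | nil => intro x h; cases h
  | cons a t ih =>
    intro x h
    rw [List.dropWhile_cons] at h
    by_cases hp : p a
    · exact ih x (by rwa [if_pos hp] at h)
    · have hpb : p a = false := by simp [hp]
      rw [hpb] at h
      simp only [Bool.false_eq_true, if_false, List.head?_cons, Option.some.injEq] at h
      rw [← h]
      exact hpb

-- ===== union-find lemmas =====

def pvRooted (p : PySem.Dict Int Int) (f : Nat) (x : Int) : Prop :=
  p.get? (pvFind p f x) = none

lemma pvFind_of_root (p : PySem.Dict Int Int) (x : Int) (h : p.get? x = none) :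
    ∀ f, pvFind p f x = x := by
  intro f
  cases f with
  | zero => rfl
  | succ g => simp [pvFind, h]

lemma pvFind_mono (p : PySem.Dict Int Int) :
    ∀ f x g, pvRooted p f x → f ≤ g → pvFind p g x = pvFind p f x := by
  intro f
  induction f with
  | zero =>
    intro x g hr _
    have hx : p.get? x = none := hr
    rw [pvFind_of_root p x hx g]
    rfl
  | succ m ih =>
    intro x g hr hg
    obtain ⟨g', rfl⟩ : ∃ g', g = g' + 1 := ⟨g - 1, by omega⟩
    cases hpx : p.get? x with
    | none =>
      rw [pvFind_of_root p x hpx, pvFind_of_root p x hpx]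
    | some y =>
      have h1 : pvFind p (m + 1) x = pvFind p m y := by simp [pvFind, hpx]
      have h2 : pvFind p (g' + 1) x = pvFind p g' y := by simp [pvFind, hpx]
      rw [h1, h2]
      refine ih y g' ?_ (by omega)
      unfold pvRooted at hr ⊢
      rwa [h1] at hr

lemma pvFind_insert (p : PySem.Dict Int Int) (ru rv : Int)
    (hru : p.get? ru = none) (hrv : p.get? rv = none) (hne : rv ≠ ru) :
    ∀ f x, pvRooted p f x →
      pvFind (p.insert ru rv) (f + 1) x = (if pvFind p f x = ru then rv else pvFind p f x)
      ∧ pvRooted (p.insert ru rv) (f + 1) x := by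
  have hins : ∀ z, (p.insert ru rv).get? z = if z = ru then some rv else p.get? z :=
    fun z => PySem.Dict.get?_insert ..
  have hrv' : (p.insert ru rv).get? rv = none := by rw [hins, if_neg hne]; exact hrv
  intro f
  induction f with
  | zero =>
    intro x hr
    have hx : p.get? x = none := hr
    by_cases hxr : x = ru
    · subst hxr
      have hx' : (p.insert x rv).get? x = some rv := by rw [hins, if_pos rfl]
      have e : pvFind (p.insert x rv) 1 x = rv := by simp [pvFind, hx']
      refine ⟨?_, ?_⟩
      · rw [e]; simp [pvFind]
      · unfold pvRooted; rw [e]; exact hrv'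
    · have hx' : (p.insert ru rv).get? x = none := by rw [hins, if_neg hxr]; exact hx
      have e : pvFind (p.insert ru rv) 1 x = x := by simp [pvFind, hx']
      refine ⟨?_, ?_⟩
      · rw [e]; simp [pvFind, hxr]
      · unfold pvRooted; rw [e]; exact hx'
  | succ m ih =>
    intro x hr
    cases hpx : p.get? x with
    | none =>
      by_cases hxr : x = ru
      · subst hxr
        have hx' : (p.insert x rv).get? x = some rv := by rw [hins, if_pos rfl]
        have e : pvFind (p.insert x rv) (m + 1 + 1) x = pvFind (p.insert x rv) (m + 1) rv := by
          simp [pvFind, hx']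
        rw [e, pvFind_of_root _ rv hrv', pvFind_of_root p x hpx]
        refine ⟨by simp, ?_⟩
        unfold pvRooted
        rw [e, pvFind_of_root _ rv hrv']
        exact hrv'
      · have hx' : (p.insert ru rv).get? x = none := by rw [hins, if_neg hxr]; exact hpx
        rw [pvFind_of_root _ x hx', pvFind_of_root p x hpx]
        refine ⟨by simp [hxr], ?_⟩
        unfold pvRooted
        rw [pvFind_of_root _ x hx']
        exact hx'
    | some y =>
      have hxr : x ≠ ru := by
        intro h; rw [h, hru] at hpx; cases hpx
      have hx' : (p.insert ru rv).get? x = some y := by rw [hins, if_neg hxr]; exact hpx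
      have h1 : pvFind p (m + 1) x = pvFind p m y := by simp [pvFind, hpx]
      have h2 : pvFind (p.insert ru rv) (m + 1 + 1) x = pvFind (p.insert ru rv) (m + 1) y := by
        simp [pvFind, hx']
      have hry : pvRooted p m y := by
        unfold pvRooted at hr ⊢
        rwa [h1] at hr
      obtain ⟨e1, e2⟩ := ih y hry
      refine ⟨?_, ?_⟩
      · rw [h2, e1, h1]
      · unfold pvRooted at e2 ⊢
        rwa [h2]

def pvRootC (p : PySem.Dict Int Int) (x : Int) : Int := pvFind p p.size x

lemma pvReach_nil {x y : Int} (h : pvReach [] x y) : x = y := by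
  induction h with
  | refl => rfl
  | step _ e _ =>
    rcases e with e | e <;> exact absurd e (List.not_mem_nil)

lemma pvE_append_edge (E : List (List Int)) (u v a b : Int) :
    pvE (E ++ [[u, v]]) a b ↔ pvE E a b ∨ (a = u ∧ b = v) ∨ (a = v ∧ b = u) := by
  unfold pvE
  simp only [List.mem_append, List.mem_singleton, List.cons.injEq, and_true]
  tauto

lemma pvReach_append_right {E : List (List Int)} (D : List (List Int)) {x y : Int}
    (h : pvReach E x y) : pvReach (E ++ D) x y := by
  induction h with
  | refl => exact pvReach.refl
  | step _ e ih =>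
    refine ih.step ?_
    rcases e with e | e
    · exact Or.inl (List.mem_append.mpr (Or.inl e))
    · exact Or.inr (List.mem_append.mpr (Or.inl e))

lemma pvReach_append_edge (E : List (List Int)) (u v x y : Int) :
    pvReach (E ++ [[u, v]]) x y ↔
      pvReach E x y ∨ (pvReach E x u ∧ pvReach E v y) ∨ (pvReach E x v ∧ pvReach E u y) := by
  constructor
  · intro h
    induction h with
    | refl => exact Or.inl pvReach.refl
    | step _ e ih =>
      rename_i a b _
      rcases (pvE_append_edge E u v a b).mp e with he | ⟨rfl, rfl⟩ | ⟨rfl, rfl⟩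
      · rcases ih with h1 | ⟨h1, h2⟩ | ⟨h1, h2⟩
        · exact Or.inl (h1.step he)
        · exact Or.inr (Or.inl ⟨h1, h2.step he⟩)
        · exact Or.inr (Or.inr ⟨h1, h2.step he⟩)
      · rcases ih with h1 | ⟨h1, _⟩ | ⟨h1, _⟩
        · exact Or.inr (Or.inl ⟨h1, pvReach.refl⟩)
        · exact Or.inr (Or.inl ⟨h1, pvReach.refl⟩)
        · exact Or.inl h1
      · rcases ih with h1 | ⟨h1, _⟩ | ⟨h1, _⟩
        · exact Or.inr (Or.inr ⟨h1, pvReach.refl⟩)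
        · exact Or.inl h1
        · exact Or.inr (Or.inr ⟨h1, pvReach.refl⟩)
  · intro h
    have hedge : pvE (E ++ [[u, v]]) u v := Or.inl (List.mem_append.mpr (Or.inr (by simp)))
    rcases h with h | ⟨h1, h2⟩ | ⟨h1, h2⟩
    · exact pvReach_append_right _ h
    · exact pvReach_trans ((pvReach_append_right _ h1).step hedge) (pvReach_append_right _ h2)
    · exact pvReach_trans ((pvReach_append_right _ h1).step (pvE_symm hedge))
        (pvReach_append_right _ h2)

lemma pvUF_step (E : List (List Int)) (p : PySem.Dict Int Int) (u v : Int) (F : Nat)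
    (hF : p.size ≤ F)
    (hroot : ∀ x, pvRooted p p.size x)
    (hequiv : ∀ x y, pvRootC p x = pvRootC p y ↔ pvReach E x y) :
    (∀ x, pvRooted (pvUFStep F p [u, v]) (pvUFStep F p [u, v]).size x)
    ∧ (∀ x y, pvRootC (pvUFStep F p [u, v]) x = pvRootC (pvUFStep F p [u, v]) y
        ↔ pvReach (E ++ [[u, v]]) x y)
    ∧ (pvUFStep F p [u, v]).size ≤ p.size + 1 := by
  have hfu : pvFind p F u = pvRootC p u := pvFind_mono p p.size u F (hroot u) hF
  have hfv : pvFind p F v = pvRootC p v := pvFind_mono p p.size v F (hroot v) hF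
  have hstep : pvUFStep F p [u, v]
      = (if pvFind p F u == pvFind p F v then p else p.insert (pvFind p F u) (pvFind p F v)) := rfl
  rw [hstep, hfu, hfv]
  by_cases hrr : pvRootC p u = pvRootC p v
  · rw [if_pos (by simpa using hrr)]
    refine ⟨hroot, ?_, by omega⟩
    intro x y
    rw [pvReach_append_edge, ← hequiv x y, ← hequiv x u, ← hequiv v y, ← hequiv x v, ← hequiv u y]
    constructor
    · intro h; exact Or.inl h
    · rintro (h | ⟨h1, h2⟩ | ⟨h1, h2⟩)
      · exact h
      · rw [h1, hrr, h2]
      · rw [h1, ← hrr, h2]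
  · rw [if_neg (by simpa using hrr)]
    have hru : p.get? (pvRootC p u) = none := hroot u
    have hrv : p.get? (pvRootC p v) = none := hroot v
    have hne : pvRootC p v ≠ pvRootC p u := fun h => hrr h.symm
    have htr := fun x => pvFind_insert p (pvRootC p u) (pvRootC p v) hru hrv hne p.size x (hroot x)
    have hcontains : p.contains (pvRootC p u) = false :=
      (PySem.Dict.get?_eq_none_iff_contains ..).mp hru
    have hsize : (p.insert (pvRootC p u) (pvRootC p v)).size = p.size + 1 := by
      rw [PySem.Dict.size_insert, if_neg (by simp [hcontains])]
    have hroot' : ∀ x, pvRootC (p.insert (pvRootC p u) (pvRootC p v)) x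
        = if pvRootC p x = pvRootC p u then pvRootC p v else pvRootC p x := by
      intro x
      have hdef : pvRootC (p.insert (pvRootC p u) (pvRootC p v)) x
          = pvFind (p.insert (pvRootC p u) (pvRootC p v))
              ((p.insert (pvRootC p u) (pvRootC p v)).size) x := rfl
      rw [hdef, hsize]
      exact (htr x).1
    refine ⟨?_, ?_, by omega⟩
    · intro x
      show (p.insert (pvRootC p u) (pvRootC p v)).get?
          (pvFind (p.insert (pvRootC p u) (pvRootC p v))
            ((p.insert (pvRootC p u) (pvRootC p v)).size) x) = none
      rw [hsize]
      exact (htr x).2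
    · intro x y
      rw [hroot' x, hroot' y, pvReach_append_edge,
        ← hequiv x y, ← hequiv x u, ← hequiv v y, ← hequiv x v, ← hequiv u y]
      split_ifs <;> constructor <;> intro h <;> omega

lemma pvUF_ind (F : Nat) : ∀ (L E : List (List Int)) (p : PySem.Dict Int Int),
    (∀ r ∈ L, r.length = 2) → p.size + L.length ≤ F →
    (∀ x, pvRooted p p.size x) →
    (∀ x y, pvRootC p x = pvRootC p y ↔ pvReach E x y) →
    (∀ x, pvRooted (L.foldl (pvUFStep F) p) (L.foldl (pvUFStep F) p).size x)
    ∧ (∀ x y, pvRootC (L.foldl (pvUFStep F) p) x = pvRootC (L.foldl (pvUFStep F) p) y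
        ↔ pvReach (E ++ L) x y)
    ∧ (L.foldl (pvUFStep F) p).size ≤ p.size + L.length := by
  intro L
  induction L with
  | nil =>
    intro E p _ _ h1 h2
    rw [List.foldl_nil]
    refine ⟨h1, ?_, by simp⟩
    intro x y
    rw [List.append_nil]
    exact h2 x y
  | cons row t ih =>
    intro E p h2 hF h1 heq
    obtain ⟨u, v, rfl⟩ : ∃ u v, row = [u, v] := by
      have hlen := h2 row (List.mem_cons_self ..)
      rcases row with _ | ⟨u, _ | ⟨v, _ | _⟩⟩ <;> simp at hlen
      exact ⟨u, v, rfl⟩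
    obtain ⟨hr', he', hs'⟩ := pvUF_step E p u v F (by simp at hF; omega) h1 heq
    rw [List.foldl_cons]
    obtain ⟨a1, a2, a3⟩ := ih (E ++ [[u, v]]) (pvUFStep F p [u, v])
      (fun r hr => h2 r (List.mem_cons_of_mem _ hr)) (by simp at hF ⊢; omega) hr' he'
    refine ⟨a1, ?_, ?_⟩
    · intro x y
      rw [a2 x y, List.append_assoc, List.singleton_append]
    · simp only [List.length_cons] at *
      omega

-- range(a, b) has no duplicates
lemma pvRange_nodup : ∀ (n : Nat) (a b : Int), (b - a).toNat ≤ n →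
    (PySem.List.pyRange a b 1).Nodup := by
  intro n
  induction n with
  | zero =>
    intro a b h
    have : PySem.List.pyRange a b 1 = [] :=
      List.eq_nil_iff_forall_not_mem.mpr (fun x hx => by
        have := PySem.List.mem_pyRange_one.mp hx; omega)
    rw [this]
    exact List.nodup_nil
  | succ m ih =>
    intro a b h
    by_cases hab : a < b
    · rw [PySem.List.pyRange_one_cons hab]
      refine List.nodup_cons.mpr ⟨?_, ih (a + 1) b (by omega)⟩
      intro hm
      have := PySem.List.mem_pyRange_one.mp hm
      omega
    · have : PySem.List.pyRange a b 1 = [] :=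
        List.eq_nil_iff_forall_not_mem.mpr (fun x hx => by
          have := PySem.List.mem_pyRange_one.mp hx; omega)
      rw [this]
      exact List.nodup_nil

-- the alive-building fold groups the scanned ids by their root, in scan order
lemma pvAliveGetD (f : Int → Int) :
    ∀ (xs : List Int) (d : PySem.Dict Int (PySem.Set Int)), xs.Nodup →
      (∀ r y, y ∈ d.getD r PySem.Set.empty → f y = r) →
      (∀ x ∈ xs, x ∉ d.getD (f x) PySem.Set.empty) →
      ∀ r, (xs.foldl (fun d x =>
          d.insert (f x) (PySem.Set.add (d.getD (f x) PySem.Set.empty) x)) d).getD r PySem.Set.empty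
        = d.getD r PySem.Set.empty ++ xs.filter (fun x => decide (f x = r)) := by
  intro xs
  induction xs with
  | nil => intro d _ _ _ r; simp
  | cons x t ih =>
    intro d hnd hinv hfresh r
    obtain ⟨hxh, hndt⟩ := List.nodup_cons.mp hnd
    rw [List.foldl_cons]
    have hx : x ∉ d.getD (f x) PySem.Set.empty := hfresh x (List.mem_cons_self ..)
    have hadd : PySem.Set.add (d.getD (f x) PySem.Set.empty) x
        = d.getD (f x) PySem.Set.empty ++ [x] := PySem.Set.add_of_not_mem hx
    have hgetD : ∀ s, (d.insert (f x) (PySem.Set.add (d.getD (f x) PySem.Set.empty) x)).getD s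
          PySem.Set.empty
        = if s = f x then d.getD (f x) PySem.Set.empty ++ [x] else d.getD s PySem.Set.empty := by
      intro s
      rw [PySem.Dict.getD_insert, hadd]
    rw [ih _ hndt ?_ ?_ r]
    · rw [hgetD r, List.filter_cons]
      by_cases hr : r = f x
      · have hd : (decide (f x = r)) = true := by simp [hr]
        rw [if_pos hr, hd]
        simp [List.append_assoc, hr]
      · have hd : (decide (f x = r)) = false := by
          simp only [decide_eq_false_iff_not]
          exact fun h => hr h.symm
        rw [if_neg hr, hd]
        simp
    · intro r' y hy
      rw [hgetD r'] at hy
      by_cases hr' : r' = f x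
      · rw [if_pos hr'] at hy
        rcases List.mem_append.mp hy with hy | hy
        · rw [hinv _ y hy, hr']
        · rcases List.mem_singleton.mp hy with rfl
          exact hr'.symm
      · rw [if_neg hr'] at hy
        exact hinv r' y hy
    · intro z hz
      rw [hgetD (f z)]
      by_cases hzf : f z = f x
      · rw [if_pos hzf]
        intro hmem
        rcases List.mem_append.mp hmem with hmem | hmem
        · rw [← hzf] at hmem
          exact hfresh z (List.mem_cons_of_mem _ hz) hmem
        · rcases List.mem_singleton.mp hmem with rfl
          exact hxh hz
      · rw [if_neg hzf]
        exact hfresh z (List.mem_cons_of_mem _ hz)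

-- Pre_'s connection conditions confine reachability from a scanned station to 0..c
lemma pvReach_range' {conns : List (List Int)} {c : Int}
    (hconn : ∀ row ∈ conns, row.length = 2 ∧
      (((1 ≤ row.getD 0 0 ∧ row.getD 0 0 ≤ c) ∨ (1 ≤ row.getD 1 0 ∧ row.getD 1 0 ≤ c)) →
        ((0 ≤ row.getD 0 0 ∧ row.getD 0 0 ≤ c) ∧ (0 ≤ row.getD 1 0 ∧ row.getD 1 0 ≤ c))))
    (hnb : ¬((∃ row ∈ conns, pvZeroOut c row) ∧ (∃ row ∈ conns, pvZeroIn c row)))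
    {s x : Int} (hs1 : 1 ≤ s) (hsc : s ≤ c) (h : pvReach conns s x) : 0 ≤ x ∧ x ≤ c := by
  suffices hst : (1 ≤ x ∧ x ≤ c) ∨ (x = 0 ∧ ∃ row ∈ conns, pvZeroIn c row) by
    rcases hst with ⟨h1, h2⟩ | ⟨h0, _⟩
    · exact ⟨by omega, h2⟩
    · exact ⟨by omega, by omega⟩
  induction h with
  | refl => exact Or.inl ⟨hs1, hsc⟩
  | step hr e ih =>
    rename_i a b
    have hrow : ∃ row ∈ conns,
        (row.getD 0 0 = a ∧ row.getD 1 0 = b) ∨ (row.getD 0 0 = b ∧ row.getD 1 0 = a) := by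
      rcases e with e | e
      · exact ⟨[a, b], e, Or.inl ⟨rfl, rfl⟩⟩
      · exact ⟨[b, a], e, Or.inr ⟨rfl, rfl⟩⟩
    obtain ⟨row, hrmem, hro⟩ := hrow
    have hiff := (hconn row hrmem).2
    rcases ih with ⟨ha1, hac⟩ | ⟨ha0, hzi⟩
    · have hbb : (0 ≤ a ∧ a ≤ c) ∧ (0 ≤ b ∧ b ≤ c) := by
        rcases hro with ⟨e0, e1⟩ | ⟨e0, e1⟩
        · have hx := hiff (Or.inl (by rw [e0]; exact ⟨ha1, hac⟩))
          rw [e0, e1] at hx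
          exact hx
        · have hx := hiff (Or.inr (by rw [e1]; exact ⟨ha1, hac⟩))
          rw [e0, e1] at hx
          exact ⟨hx.2, hx.1⟩
      by_cases hb0 : b = 0
      · refine Or.inr ⟨hb0, ⟨row, hrmem, ?_⟩⟩
        rcases hro with ⟨e0, e1⟩ | ⟨e0, e1⟩
        · exact Or.inr ⟨by rw [e1, hb0], by rw [e0]; exact ⟨ha1, hac⟩⟩
        · exact Or.inl ⟨by rw [e0, hb0], by rw [e1]; exact ⟨ha1, hac⟩⟩
      · obtain ⟨hb1, hbc⟩ := hbb.2
        exact Or.inl ⟨by omega, hbc⟩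
    · by_cases hbin : 0 ≤ b ∧ b ≤ c
      · by_cases hb0 : b = 0
        · exact Or.inr ⟨hb0, hzi⟩
        · exact Or.inl ⟨by omega, hbin.2⟩
      · exfalso
        apply hnb
        refine ⟨⟨row, hrmem, ?_⟩, hzi⟩
        rcases hro with ⟨e0, e1⟩ | ⟨e0, e1⟩
        · exact Or.inl ⟨by rw [e0, ha0], by rw [e1]; exact hbin⟩
        · exact Or.inr ⟨by rw [e1, ha0], by rw [e0]; exact hbin⟩

-- joint invariant of the two query loops: statuses mirror the offline set; per component, A's
-- shared list is the reversed online-suffix R of the ascending member list, with the popped prefix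
-- P offline and R's head online; B's alive sets hold exactly the online ids of 0..c per root
def pvQRel (c : Int) (rt : Int → Int) (comps : List (List Int))
    (stA : List (List Int) × (Int → Bool) × List Int)
    (stB : PySem.Set Int × PySem.Dict Int (PySem.Set Int) × List Int) : Prop :=
  stA.2.2 = stB.2.2 ∧
  (∀ x, stA.2.1 x = true ↔ x ∉ stB.1) ∧
  stA.1.length = comps.length ∧
  (∀ (i : Nat) (S : List Int), comps[i]? = some S → ∃ P R : List Int, S = P ++ R ∧
      stA.1[i]? = some R.reverse ∧ (∀ x ∈ P, x ∈ stB.1) ∧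
      (∀ x, R.head? = some x → x ∉ stB.1)) ∧
  (∀ (r y : Int), y ∈ stB.2.1.getD r PySem.Set.empty ↔
      (rt y = r ∧ 0 ≤ y ∧ y ≤ c ∧ y ∉ stB.1)) ∧
  (∀ x ∈ stB.1, 0 ≤ x ∧ x ≤ c)

lemma pvQ_step (conns : List (List Int)) (c : Int) (parent : PySem.Dict Int Int)
    (gm : PySem.Dict Int Nat) (comps : List (List Int))
    (hgm_lt : ∀ x i, gm.get? x = some i → i < comps.length)
    (hgm_cl : ∀ x i, gm.get? x = some i → ∀ y, pvReach conns x y → gm.get? y = some i)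
    (hmem : ∀ (i : Nat) (S : List Int), comps[i]? = some S → ∀ x, (x ∈ S ↔ gm.get? x = some i))
    (hsort : ∀ (i : Nat) (S : List Int), comps[i]? = some S → S.Pairwise (· < ·))
    (hclass : ∀ (i : Nat) (S : List Int), comps[i]? = some S →
      ∃ s, ∀ x, x ∈ S ↔ pvReach conns s x)
    (hcov : ∀ s : Int, 1 ≤ s → s ≤ c → (gm.get? s).isSome)
    (hrt : ∀ x y, pvFind parent conns.length x = pvFind parent conns.length y ↔ pvReach conns x y)
    (hcompsub : ∀ (i : Nat) (S : List Int), comps[i]? = some S → ∀ y ∈ S, 0 ≤ y ∧ y ≤ c)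
    (a n : Int) (hn2 : a = 2 → 0 ≤ n ∧ n ≤ c)
    (stA : List (List Int) × (Int → Bool) × List Int)
    (stB : PySem.Set Int × PySem.Dict Int (PySem.Set Int) × List Int)
    (hrel : pvQRel c (fun x => pvFind parent conns.length x) comps stA stB) :
    pvQRel c (fun x => pvFind parent conns.length x) comps
      (pvStepA gm stA [a, n]) (pvStepBQ parent conns.length stB [a, n]) := by
  obtain ⟨pool, status, res⟩ := stA
  obtain ⟨offline, alive, resB⟩ := stB
  obtain ⟨hres, hst, hlA, hcomp, halive, hoffb⟩ := hrel
  simp only at hres hst hlA hcomp halive hoffb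
  subst hres
  show pvQRel c _ comps (pvStepA gm (pool, status, res) [a, n])
    (pvStepBQ parent conns.length (offline, alive, res) [a, n])
  unfold pvStepA pvStepBQ
  simp only []
  by_cases ha : (a == 2) = true
  · rw [if_pos ha, if_pos ha]
    have hnb2 : 0 ≤ n ∧ n ≤ c := hn2 (by simpa using ha)
    have hoffb' : ∀ x ∈ PySem.Set.add offline n, 0 ≤ x ∧ x ≤ c := by
      intro x hx
      rcases (PySem.Set.mem_add offline n x).mp hx with hx | hx
      · exact hoffb x hx
      · subst hx; exact hnb2
    have hst' : ∀ x, (if x == n then false else status x) = true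
        ↔ x ∉ PySem.Set.add offline n := by
      intro x
      by_cases hxn : x = n
      · subst hxn
        simp [PySem.Set.mem_add]
      · have hbe : (x == n) = false := by simp [hxn]
        rw [hbe]
        simp only [Bool.false_eq_true, if_false]
        rw [hst x]
        constructor
        · intro h hm
          rcases (PySem.Set.mem_add offline n x).mp hm with hm | hm
          · exact h hm
          · exact hxn hm
        · intro h hm
          exact h ((PySem.Set.mem_add offline n x).mpr (Or.inl hm))
    have halive' : ∀ (r y : Int),
        y ∈ ((alive.insert (pvFind parent conns.length n)
            (PySem.Set.discard
              (alive.getD (pvFind parent conns.length n) PySem.Set.empty) n)).getD r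
            PySem.Set.empty) ↔
          (pvFind parent conns.length y = r ∧ 0 ≤ y ∧ y ≤ c ∧
            y ∉ PySem.Set.add offline n) := by
      intro r y
      rw [PySem.Dict.getD_insert]
      by_cases hr : r = pvFind parent conns.length n
      · subst hr
        rw [if_pos rfl, PySem.Set.mem_discard, halive]
        constructor
        · rintro ⟨⟨h1, h2, h3, h4⟩, h5⟩
          refine ⟨h1, h2, h3, ?_⟩
          intro hm
          rcases (PySem.Set.mem_add offline n y).mp hm with hm | hm
          · exact h4 hm
          · exact h5 hm
        · rintro ⟨h1, h2, h3, h4⟩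
          have hyn : y ≠ n := fun h => h4 ((PySem.Set.mem_add offline n y).mpr (Or.inr h))
          exact ⟨⟨h1, h2, h3, fun hm => h4 ((PySem.Set.mem_add offline n y).mpr (Or.inl hm))⟩, hyn⟩
      · rw [if_neg hr, halive]
        constructor
        · rintro ⟨h1, h2, h3, h4⟩
          refine ⟨h1, h2, h3, ?_⟩
          intro hm
          rcases (PySem.Set.mem_add offline n y).mp hm with hm | hm
          · exact h4 hm
          · exact absurd (by rw [← hm]; exact h1.symm) hr
        · rintro ⟨h1, h2, h3, h4⟩
          exact ⟨h1, h2, h3, fun hm => h4 ((PySem.Set.mem_add offline n y).mpr (Or.inl hm))⟩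
    cases hgn : gm.get? n with
    | none =>
      refine ⟨rfl, hst', hlA, ?_, halive', hoffb'⟩
      intro j S hS
      obtain ⟨P, R, hSplit, hPool, hP, hHead⟩ := hcomp j S hS
      refine ⟨P, R, hSplit, hPool, ?_, ?_⟩
      · intro x hx
        exact (PySem.Set.mem_add offline n x).mpr (Or.inl (hP x hx))
      · intro x hx
        have hxS : x ∈ S := by
          rw [hSplit]
          exact List.mem_append.mpr (Or.inr (List.mem_of_mem_head? hx))
        have hxg := (hmem j S hS x).mp hxS
        have hxn : x ≠ n := by
          intro h
          rw [h, hgn] at hxg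
          cases hxg
        intro hm
        rcases (PySem.Set.mem_add offline n x).mp hm with hm | hm
        · exact hHead x hx hm
        · exact hxn hm
    | some i =>
      simp only []
      have hilt := hgm_lt n i hgn
      have hS : comps[i]? = some (comps[i]'hilt) := List.getElem?_eq_getElem hilt
      obtain ⟨P, R, hSplit, hPool, hP, hHead⟩ := hcomp i (comps[i]'hilt) hS
      have hpoolD : pool.getD i [] = R.reverse := by
        rw [List.getD_eq_getElem?_getD, hPool]
        rfl
      have hpop : pvPopLoop (fun x => if x == n then false else status x)
          (pool.getD i []).length (pool.getD i [])
          = (R.dropWhile (fun x => !(if x == n then false else status x))).reverse := by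
        rw [hpoolD, pvPopLoop_eq _ _ _ (le_refl _), List.reverse_reverse]
      rw [hpop]
      refine ⟨rfl, hst', by simpa using hlA, ?_, halive', hoffb'⟩
      intro j S' hS'
      by_cases hij : i = j
      · subst hij
        rw [hS] at hS'
        cases hS'
        set q : Int → Bool := fun x => !(if x == n then false else status x) with hq
        refine ⟨P ++ R.takeWhile q, R.dropWhile q, ?_, ?_, ?_, ?_⟩
        · rw [hSplit]
          simp only [List.append_assoc]
          rw [List.takeWhile_append_dropWhile]
        · simp only []
          rw [List.getElem?_set_self (by rw [hlA]; exact hilt)]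
        · intro x hx
          rcases List.mem_append.mp hx with hx | hx
          · exact (PySem.Set.mem_add offline n x).mpr (Or.inl (hP x hx))
          · have h3 := List.mem_takeWhile_imp hx
            rw [hq] at h3
            simp only [Bool.not_eq_true'] at h3
            by_contra hno
            have hcontra := (hst' x).mpr hno
            rw [h3] at hcontra
            cases hcontra
        · intro x hx
          have h3 := pvHead?_dropWhile q _ x hx
          rw [hq] at h3
          simp only [Bool.not_eq_false'] at h3
          exact (hst' x).mp h3
      · obtain ⟨P', R', hSplit', hPool', hP', hHead'⟩ := hcomp j S' hS'
        refine ⟨P', R', hSplit', ?_, ?_, ?_⟩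
        · simp only []
          rw [List.getElem?_set_ne (fun h => hij h)]
          exact hPool'
        · intro x hx
          exact (PySem.Set.mem_add offline n x).mpr (Or.inl (hP' x hx))
        · intro x hx
          have hxS : x ∈ S' := by
            rw [hSplit']
            exact List.mem_append.mpr (Or.inr (List.mem_of_mem_head? hx))
          have hxg := (hmem j S' hS' x).mp hxS
          have hxn : x ≠ n := by
            intro h
            rw [h, hgn] at hxg
            cases hxg
            exact hij rfl
          intro hm
          rcases (PySem.Set.mem_add offline n x).mp hm with hm | hm
          · exact hHead' x hx hm
          · exact hxn hm
  · rw [if_neg ha, if_neg ha]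
    by_cases hon : status n = true
    · rw [if_pos hon]
      have hnoff : n ∉ offline := (hst n).mp hon
      have hcont : (!(PySem.Set.contains offline n)) = true := by
        have : PySem.Set.contains offline n = false := by
          rw [← Bool.not_eq_true]
          intro hc
          exact hnoff ((PySem.Set.contains_iff _ _).mp hc)
        rw [this]
        rfl
      rw [if_pos hcont]
      exact ⟨rfl, hst, hlA, hcomp, halive, hoffb⟩
    · rw [if_neg hon]
      have hnoff : n ∈ offline := by
        by_contra hno
        exact hon ((hst n).mpr hno)
      obtain ⟨hn0, hnc⟩ : 0 ≤ n ∧ n ≤ c := hoffb n hnoff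
      have hcont : (!(PySem.Set.contains offline n)) = false := by
        rw [(PySem.Set.contains_iff _ _).mpr hnoff]
        rfl
      rw [if_neg (by rw [hcont]; exact Bool.false_ne_true)]
      cases hgn : gm.get? n with
      | none =>
        have hn0' : n = 0 := by
          by_contra hne
          have h1 : 1 ≤ n := by omega
          have := hcov n h1 hnc
          rw [hgn] at this
          cases this
        have hsempty : alive.getD (pvFind parent conns.length n) PySem.Set.empty = [] := by
          refine List.eq_nil_iff_forall_not_mem.mpr (fun y hy => ?_)
          obtain ⟨h1, h2, h3, h4⟩ := (halive _ y).mp hy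
          have hry : pvReach conns y n := (hrt y n).mp h1
          have hy0 : y = 0 := by
            by_contra hne
            have h1y : 1 ≤ y := by omega
            obtain ⟨j, hj⟩ := Option.isSome_iff_exists.mp (hcov y h1y h3)
            have := hgm_cl y j hj n hry
            rw [hgn] at this
            cases this
          rw [hy0, ← hn0'] at h4
          exact h4 hnoff
        rw [hsempty]
        simp only [List.isEmpty_nil, if_pos]
        exact ⟨rfl, hst, hlA, hcomp, halive, hoffb⟩
      | some i =>
        simp only []
        have hilt := hgm_lt n i hgn
        have hS : comps[i]? = some (comps[i]'hilt) := List.getElem?_eq_getElem hilt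
        obtain ⟨P, R, hSplit, hPool, hP, hHead⟩ := hcomp i (comps[i]'hilt) hS
        have hpoolD : pool.getD i [] = R.reverse := by
          rw [List.getD_eq_getElem?_getD, hPool]
          rfl
        have hnS : n ∈ comps[i]'hilt := (hmem i _ hS n).mpr hgn
        obtain ⟨s0, hs0⟩ := hclass i (comps[i]'hilt) hS
        have hsn0 : pvReach conns s0 n := (hs0 n).mp hnS
        have hsetmem : ∀ y, y ∈ alive.getD (pvFind parent conns.length n) PySem.Set.empty
            ↔ (y ∈ R ∧ y ∉ offline) := by
          intro y
          rw [halive]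
          constructor
          · rintro ⟨h1, h2, h3, h4⟩
            have hny : pvReach conns n y := (hrt n y).mp h1.symm
            have hyS : y ∈ comps[i]'hilt := (hs0 y).mpr (pvReach_trans hsn0 hny)
            rw [hSplit] at hyS
            rcases List.mem_append.mp hyS with hyP | hyR
            · exact absurd (hP y hyP) h4
            · exact ⟨hyR, h4⟩
          · rintro ⟨hyR, hyoff⟩
            have hyS : y ∈ comps[i]'hilt := by
              rw [hSplit]
              exact List.mem_append.mpr (Or.inr hyR)
            have hsy : pvReach conns s0 y := (hs0 y).mp hyS
            have hny : pvReach conns n y := pvReach_trans (pvReach_symm hsn0) hsy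
            have hb := hcompsub i _ hS y hyS
            exact ⟨((hrt n y).mpr hny).symm, hb.1, hb.2, hyoff⟩
        cases hR : R with
        | nil =>
          subst hR
          have hle : pool.getD i [] = [] := by rw [hpoolD]; rfl
          have hse : alive.getD (pvFind parent conns.length n) PySem.Set.empty = [] := by
            refine List.eq_nil_iff_forall_not_mem.mpr (fun y hy => ?_)
            have := ((hsetmem y).mp hy).1
            simp at this
          rw [hle, hse]
          simp only [List.isEmpty_nil, if_pos]
          exact ⟨rfl, hst, hlA, hcomp, halive, hoffb⟩
        | cons r t =>
          subst hR
          have hrS : r ∈ comps[i]'hilt := by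
            rw [hSplit]
            exact List.mem_append.mpr (Or.inr (List.mem_cons_self ..))
          have hroff : r ∉ offline := hHead r rfl
          have hrs : r ∈ alive.getD (pvFind parent conns.length n) PySem.Set.empty :=
            (hsetmem r).mpr ⟨List.mem_cons_self .., hroff⟩
          have hsne : alive.getD (pvFind parent conns.length n) PySem.Set.empty ≠ [] :=
            List.ne_nil_of_mem hrs
          have hAval : (if (pool.getD i []).isEmpty = true then (pool, status, res ++ [-1])
              else (pool, status, res ++ [PySem.List.pyGetD (pool.getD i []) (-1) 0]))
              = (pool, status, res ++ [r]) := by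
            rw [hpoolD]
            simp only [List.reverse_cons]
            rw [if_neg (by simp)]
            rw [PySem.List.pyGetD_neg_one_append_singleton]
          have hBval : (if (alive.getD (pvFind parent conns.length n) PySem.Set.empty).isEmpty = true
              then (-1 : Int)
              else (PySem.List.min? (alive.getD (pvFind parent conns.length n)
                PySem.Set.empty) (fun x => x)).getD (-1)) = r := by
            rw [if_neg (by simp only [List.isEmpty_iff]; exact hsne)]
            cases hmin : PySem.List.min? (alive.getD (pvFind parent conns.length n)
                PySem.Set.empty) (fun x => x) with
            | none => exact absurd ((PySem.List.min?_eq_none_iff ..).mp hmin) hsne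
            | some m =>
              obtain ⟨hmR, hmoff⟩ := (hsetmem m).mp (PySem.List.min?_mem hmin)
              have hmr : m ≤ r := PySem.List.min?_isMin hmin r hrs
              have hrm : r ≤ m := by
                have hps : (comps[i]'hilt).Pairwise (· < ·) := hsort i _ hS
                rw [hSplit] at hps
                have hpr : (r :: t).Pairwise (· < ·) := (List.pairwise_append.mp hps).2.1
                rcases List.mem_cons.mp hmR with rfl | hmt
                · exact le_refl _
                · exact le_of_lt ((List.pairwise_cons.mp hpr).1 m hmt)
              have : m = r := le_antisymm hmr hrm
              rw [this]
              rfl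
          rw [hAval, hBval]
          exact ⟨rfl, hst, hlA, hcomp, halive, hoffb⟩


lemma pvQ_ind (conns : List (List Int)) (c : Int) (parent : PySem.Dict Int Int)
    (gm : PySem.Dict Int Nat) (comps : List (List Int))
    (hgm_lt : ∀ x i, gm.get? x = some i → i < comps.length)
    (hgm_cl : ∀ x i, gm.get? x = some i → ∀ y, pvReach conns x y → gm.get? y = some i)
    (hmem : ∀ (i : Nat) (S : List Int), comps[i]? = some S → ∀ x, (x ∈ S ↔ gm.get? x = some i))
    (hsort : ∀ (i : Nat) (S : List Int), comps[i]? = some S → S.Pairwise (· < ·))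
    (hclass : ∀ (i : Nat) (S : List Int), comps[i]? = some S →
      ∃ s, ∀ x, x ∈ S ↔ pvReach conns s x)
    (hcov : ∀ s : Int, 1 ≤ s → s ≤ c → (gm.get? s).isSome)
    (hrt : ∀ x y, pvFind parent conns.length x = pvFind parent conns.length y ↔ pvReach conns x y)
    (hcompsub : ∀ (i : Nat) (S : List Int), comps[i]? = some S → ∀ y ∈ S, 0 ≤ y ∧ y ≤ c) :
    ∀ (qs : List (List Int)) stA stB,
      (∀ q ∈ qs, q.length = 2 ∧ (q.getD 0 0 = 2 → 0 ≤ q.getD 1 0 ∧ q.getD 1 0 ≤ c)) →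
      pvQRel c (fun x => pvFind parent conns.length x) comps stA stB →
      pvQRel c (fun x => pvFind parent conns.length x) comps
        (qs.foldl (pvStepA gm) stA) (qs.foldl (pvStepBQ parent conns.length) stB) := by
  intro qs
  induction qs with
  | nil => intro stA stB _ hrel; exact hrel
  | cons q t ih =>
    intro stA stB hok hrel
    obtain ⟨hlen2, hb2⟩ := hok q (List.mem_cons_self ..)
    obtain ⟨a, n, rfl⟩ : ∃ a n : Int, q = [a, n] := by
      rcases q with _ | ⟨a, _ | ⟨n, _ | _⟩⟩ <;> simp at hlen2
      exact ⟨a, n, rfl⟩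
    simp only [List.getD_cons_succ, List.getD_cons_zero] at hb2
    rw [List.foldl_cons, List.foldl_cons]
    exact ih _ _ (fun q hq => hok q (List.mem_cons_of_mem _ hq))
      (pvQ_step conns c parent gm comps hgm_lt hgm_cl hmem hsort hclass hcov hrt hcompsub
        a n hb2 stA stB hrel)

-- x is the id of some deactivation query of qs
def pvD (qs : List (List Int)) (x : Int) : Prop :=
  ∃ q ∈ qs, q.getD 0 0 = 2 ∧ q.getD 1 0 = x

-- when no processed query's id is ever deactivated, both query loops answer every
-- non-deactivation query with its own id, whatever the component data holds
lemma pvQ2_ind (gm : PySem.Dict Int Nat) (parent : PySem.Dict Int Int) (fuel : Nat)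
    (allq : List (List Int)) :
    ∀ (qs : List (List Int))
      (stA : List (List Int) × (Int → Bool) × List Int)
      (stB : PySem.Set Int × PySem.Dict Int (PySem.Set Int) × List Int),
      (∀ q ∈ qs, q ∈ allq) →
      (∀ q ∈ qs, q.length = 2 ∧ (q.getD 0 0 ≠ 2 → ¬ pvD allq (q.getD 1 0))) →
      stA.2.2 = stB.2.2 →
      (∀ x, ¬ pvD allq x → stA.2.1 x = true) →
      (∀ x ∈ stB.1, pvD allq x) →
      ((qs.foldl (pvStepA gm) stA).2.2 = (qs.foldl (pvStepBQ parent fuel) stB).2.2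
      ∧ (∀ x, ¬ pvD allq x → (qs.foldl (pvStepA gm) stA).2.1 x = true)
      ∧ (∀ x ∈ (qs.foldl (pvStepBQ parent fuel) stB).1, pvD allq x)) := by
  intro qs
  induction qs with
  | nil => intro stA stB _ _ h1 h2 h3; exact ⟨h1, h2, h3⟩
  | cons q t ih =>
    intro stA stB hsub hcond hres hstat hoff
    obtain ⟨pool, status, res⟩ := stA
    obtain ⟨offline, alive, resB⟩ := stB
    simp only at hres hstat hoff
    subst hres
    obtain ⟨hlen, hq2⟩ := hcond q (List.mem_cons_self ..)
    obtain ⟨a, n, rfl⟩ : ∃ a n : Int, q = [a, n] := by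
      rcases q with _ | ⟨a, _ | ⟨n, _ | _⟩⟩ <;> simp at hlen
      exact ⟨a, n, rfl⟩
    rw [List.foldl_cons, List.foldl_cons]
    have hsub' := fun q hq => hsub q (List.mem_cons_of_mem _ hq)
    have hcond' := fun q hq => hcond q (List.mem_cons_of_mem _ hq)
    unfold pvStepA pvStepBQ
    simp only []
    by_cases ha : (a == 2) = true
    · rw [if_pos ha, if_pos ha]
      have hDn : pvD allq n :=
        ⟨[a, n], hsub _ (List.mem_cons_self ..), by simpa using ha, rfl⟩
      have hstat' : ∀ x, ¬ pvD allq x → (if x == n then false else status x) = true := by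
        intro x hx
        by_cases hxn : x = n
        · subst hxn
          exact absurd hDn hx
        · rw [if_neg (fun h => hxn (by simpa using h))]
          exact hstat x hx
      have hoff' : ∀ x ∈ PySem.Set.add offline n, pvD allq x := by
        intro x hx
        rcases (PySem.Set.mem_add offline n x).mp hx with hx | hx
        · exact hoff x hx
        · subst hx
          exact hDn
      cases hgn : gm.get? n with
      | none => exact ih _ _ hsub' hcond' rfl hstat' hoff'
      | some i => exact ih _ _ hsub' hcond' rfl hstat' hoff'
    · rw [if_neg ha, if_neg ha]
      have hDn : ¬ pvD allq n := hq2 (fun h => ha (by rw [beq_iff_eq]; exact h))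
      have hstn : status n = true := hstat n hDn
      rw [if_pos hstn]
      have hnoff : n ∉ offline := fun h => hDn (hoff n h)
      have hcont : (!(PySem.Set.contains offline n)) = true := by
        have hc : PySem.Set.contains offline n = false := by
          rw [← Bool.not_eq_true]
          intro hcc
          exact hnoff ((PySem.Set.contains_iff _ _).mp hcc)
        rw [hc]
        rfl
      rw [if_pos hcont]
      exact ih _ _ hsub' hcond' rfl hstat hoff

-- the 'frozen' disjunct of Pre_
lemma pvFrozenCase (c : Int) (conns queries : List (List Int))
    (hfrozen : pvPreFrozen c conns queries) :
    processQueriesV1 c conns queries = processQueriesV1_alt c conns queries := by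
  obtain ⟨hconnF, hqF⟩ := hfrozen
  have hA : processQueriesV1 c conns queries
      = (queries.foldl (pvStepA (pvAssignA conns c).2)
          ((pvAssignA conns c).1, (fun _ => true), [])).2.2 := rfl
  have hB : processQueriesV1_alt c conns queries
      = (queries.foldl (pvStepBQ (pvUF conns) conns.length)
          (PySem.Set.empty, pvAliveInit (pvUF conns) conns.length c, [])).2.2 := rfl
  rw [hA, hB]
  have hcond : ∀ q ∈ queries, q.length = 2 ∧ (q.getD 0 0 ≠ 2 → ¬ pvD queries (q.getD 1 0)) := by
    intro q hq
    obtain ⟨hlen, hdis⟩ := hqF q hq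
    refine ⟨hlen, ?_⟩
    intro hne hd
    obtain ⟨q', hq', h2', h1'⟩ := hd
    rcases hdis with ⟨h2eq, _⟩ | ⟨_, hb1, hb2, halias⟩
    · exact hne h2eq
    · have hal := halias q' hq' h2'
      by_cases hneg : q.getD 1 0 < 0
      · have hb' : 0 ≤ q'.getD 1 0 ∧ q'.getD 1 0 ≤ c := by
          rcases (hqF q' hq').2 with ⟨_, hb⟩ | ⟨hne', _⟩
          · exact hb
          · exact absurd h2' hne'
        omega
      · rw [if_neg hneg] at hal
        exact hal h1'
  exact (pvQ2_ind (pvAssignA conns c).2 (pvUF conns) conns.length queries queries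
    ((pvAssignA conns c).1, (fun _ => true), [])
    (PySem.Set.empty, pvAliveInit (pvUF conns) conns.length c, [])
    (fun q hq => hq) hcond rfl (fun x _ => rfl) (fun x hx => absurd hx List.not_mem_nil)).1

-- the main disjunct of Pre_
lemma pvMainCase (c : Int) (conns queries : List (List Int))
    (hmain : pvPreMain c conns queries) :
    processQueriesV1 c conns queries = processQueriesV1_alt c conns queries := by
  obtain ⟨hconn, hnb, hq⟩ := hmain
  have h2 : ∀ r ∈ conns, r.length = 2 := fun r hr => (hconn r hr).1
  have hA : processQueriesV1 c conns queries
      = (queries.foldl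
          (pvStepA ((PySem.List.pyRange 1 (c + 1) 1).foldl (pvFA conns) ([], PySem.Dict.empty)).2)
          (((PySem.List.pyRange 1 (c + 1) 1).foldl (pvFA conns) ([], PySem.Dict.empty)).1,
            (fun _ => true), [])).2.2 := rfl
  have hB : processQueriesV1_alt c conns queries
      = (queries.foldl (pvStepBQ (pvUF conns) conns.length)
          (PySem.Set.empty, pvAliveInit (pvUF conns) conns.length c, [])).2.2 := rfl
  rw [hA, hB]
  -- A's assign-phase invariant
  have hinit : pvAInv conns c [] PySem.Dict.empty := by
    constructor
    · intro x i h
      rw [PySem.Dict.get?_empty] at h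
      cases h
    · intro i L hL
      simp at hL
  obtain ⟨⟨hC1, hC2⟩, _, hcov0⟩ := pvA_ind conns h2 c (PySem.List.pyRange 1 (c + 1) 1)
    [] PySem.Dict.empty
    (fun s hs => by
      have := PySem.List.mem_pyRange_one.mp hs
      exact ⟨this.1, by omega⟩)
    hinit
  set pool0 := ((PySem.List.pyRange 1 (c + 1) 1).foldl (pvFA conns) ([], PySem.Dict.empty)).1
    with hpool0
  set gm0 := ((PySem.List.pyRange 1 (c + 1) 1).foldl (pvFA conns) ([], PySem.Dict.empty)).2
    with hgm0
  set comps := pool0.map List.reverse with hcomps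
  have hlen : pool0.length = comps.length := by rw [hcomps, List.length_map]
  have hcompget : ∀ (i : Nat) (S : List Int), comps[i]? = some S →
      pool0[i]? = some S.reverse := by
    intro i S hS
    rw [hcomps, List.getElem?_map] at hS
    cases hp : pool0[i]? with
    | none => rw [hp] at hS; cases hS
    | some L =>
      rw [hp] at hS
      simp only [Option.map_some, Option.some.injEq] at hS
      rw [← hS, List.reverse_reverse]
  have hmem : ∀ (i : Nat) (S : List Int), comps[i]? = some S →
      ∀ x, (x ∈ S ↔ gm0.get? x = some i) := by
    intro i S hS x
    have hm := (hC2 i S.reverse (hcompget i S hS)).1 x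
    rw [List.mem_reverse] at hm
    exact hm
  have hsort : ∀ (i : Nat) (S : List Int), comps[i]? = some S → S.Pairwise (· < ·) := by
    intro i S hS
    have := (hC2 i S.reverse (hcompget i S hS)).2.1
    rwa [List.reverse_reverse] at this
  have hclassB : ∀ (i : Nat) (S : List Int), comps[i]? = some S →
      ∃ s, (1 ≤ s ∧ s ≤ c) ∧ ∀ x, x ∈ S ↔ pvReach conns s x := by
    intro i S hS
    obtain ⟨s, hsb, hs⟩ := (hC2 i S.reverse (hcompget i S hS)).2.2
    exact ⟨s, hsb, fun x => (List.mem_reverse).symm.trans (hs x)⟩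
  have hclass : ∀ (i : Nat) (S : List Int), comps[i]? = some S →
      ∃ s, ∀ x, x ∈ S ↔ pvReach conns s x := by
    intro i S hS
    obtain ⟨s, _, hs⟩ := hclassB i S hS
    exact ⟨s, hs⟩
  have hcompsub : ∀ (i : Nat) (S : List Int), comps[i]? = some S →
      ∀ y ∈ S, 0 ≤ y ∧ y ≤ c := by
    intro i S hS y hy
    obtain ⟨s, ⟨hs1, hsc⟩, hs⟩ := hclassB i S hS
    exact pvReach_range' hconn hnb hs1 hsc ((hs y).mp hy)
  have hgm_lt : ∀ x i, gm0.get? x = some i → i < comps.length :=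
    fun x i h => hlen ▸ (hC1 x i h).1
  have hgm_cl : ∀ x i, gm0.get? x = some i → ∀ y, pvReach conns x y → gm0.get? y = some i :=
    fun x i h => (hC1 x i h).2
  have hcov : ∀ s : Int, 1 ≤ s → s ≤ c → (gm0.get? s).isSome := by
    intro s h1 h3
    exact hcov0 s (PySem.List.mem_pyRange_one.mpr ⟨h1, by omega⟩)
  -- B's union-find invariant
  have hbase1 : ∀ x : Int, pvRooted PySem.Dict.empty (PySem.Dict.empty : PySem.Dict Int Int).size x := by
    intro x
    unfold pvRooted
    exact PySem.Dict.get?_empty ..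
  have hbase2 : ∀ x y : Int, pvRootC (PySem.Dict.empty : PySem.Dict Int Int) x
      = pvRootC PySem.Dict.empty y ↔ pvReach [] x y := by
    intro x y
    show x = y ↔ pvReach [] x y
    constructor
    · rintro rfl; exact pvReach.refl
    · exact pvReach_nil
  obtain ⟨hroot, hequiv, hsz⟩ := pvUF_ind conns.length conns [] PySem.Dict.empty h2
    (by simp) hbase1 hbase2
  have hroot' : ∀ x, pvRooted (pvUF conns) (pvUF conns).size x := hroot
  have hequiv' : ∀ x y, pvRootC (pvUF conns) x = pvRootC (pvUF conns) y ↔ pvReach conns x y := by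
    intro x y
    have h := hequiv x y
    rwa [List.nil_append] at h
  have hsz' : (pvUF conns).size ≤ conns.length := by
    have h : (conns.foldl (pvUFStep conns.length) PySem.Dict.empty).size
        ≤ (PySem.Dict.empty : PySem.Dict Int Int).size + conns.length := hsz
    simpa using h
  have hrt : ∀ x y, pvFind (pvUF conns) conns.length x = pvFind (pvUF conns) conns.length y
      ↔ pvReach conns x y := by
    intro x y
    rw [pvFind_mono (pvUF conns) ((pvUF conns).size) x conns.length (hroot' x) hsz',
      pvFind_mono (pvUF conns) ((pvUF conns).size) y conns.length (hroot' y) hsz']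
    exact hequiv' x y
  -- B's initial alive dict groups 0..c by root
  have halive0 : ∀ (r y : Int),
      y ∈ (pvAliveInit (pvUF conns) conns.length c).getD r PySem.Set.empty ↔
        (pvFind (pvUF conns) conns.length y = r ∧ 0 ≤ y ∧ y ≤ c ∧
          y ∉ (PySem.Set.empty : PySem.Set Int)) := by
    intro r y
    have h := pvAliveGetD (fun x => pvFind (pvUF conns) conns.length x)
      (PySem.List.pyRange 0 (c + 1) 1) PySem.Dict.empty
      (pvRange_nodup (c + 1 - 0).toNat 0 (c + 1) (le_refl _))
      (by
        intro r' y' hy'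
        rw [PySem.Dict.getD_empty] at hy'
        exact absurd hy' (List.not_mem_nil))
      (by
        intro x hx
        rw [PySem.Dict.getD_empty]
        exact List.not_mem_nil)
      r
    have heq : (pvAliveInit (pvUF conns) conns.length c).getD r PySem.Set.empty
        = PySem.Dict.empty.getD r PySem.Set.empty
          ++ (PySem.List.pyRange 0 (c + 1) 1).filter
            (fun x => decide (pvFind (pvUF conns) conns.length x = r)) := h
    rw [heq, PySem.Dict.getD_empty]
    show y ∈ [] ++ _ ↔ _
    rw [List.nil_append, List.mem_filter, PySem.List.mem_pyRange_one]
    constructor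
    · rintro ⟨⟨hy0, hyc⟩, hd⟩
      refine ⟨by simpa using hd, hy0, by omega, ?_⟩
      exact List.not_mem_nil
    · rintro ⟨h1, h2, h3, _⟩
      exact ⟨⟨h2, by omega⟩, by simpa using h1⟩
  -- initial joint invariant and the query loop
  have hinitQ : pvQRel c (fun x => pvFind (pvUF conns) conns.length x) comps
      (pool0, (fun _ => true), [])
      (PySem.Set.empty, pvAliveInit (pvUF conns) conns.length c, []) := by
    refine ⟨rfl, ?_, hlen, ?_, halive0, ?_⟩
    · intro x
      constructor
      · intro _
        exact List.not_mem_nil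
      · intro _
        rfl
    · intro i S hS
      refine ⟨[], S, by simp, hcompget i S hS, by simp, ?_⟩
      intro x _
      exact List.not_mem_nil
    · intro x hx
      exact absurd hx List.not_mem_nil
  have hqok : ∀ q ∈ queries, q.length = 2 ∧ (q.getD 0 0 = 2 → 0 ≤ q.getD 1 0 ∧ q.getD 1 0 ≤ c) :=
    fun q hq' => ⟨(hq q hq').1, (hq q hq').2.1⟩
  have hfin := pvQ_ind conns c (pvUF conns) gm0 comps hgm_lt hgm_cl hmem hsort hclass hcov
    hrt hcompsub queries (pool0, (fun _ => true), [])
    (PySem.Set.empty, pvAliveInit (pvUF conns) conns.length c, []) hqok hinitQ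
  exact hfin.1

-- ===== VERDICT (by name: the statement is the Claim_ definition above) =====
theorem processQueriesV1_spec : Claim_equal_processQueriesV1 := by
  unfold Claim_equal_processQueriesV1
  intro c conns queries hdom hpre
  unfold Spec_processQueriesV1
  rcases hpre with hmain | hfrozen
  · exact pvMainCase c conns queries hmain
  · exact pvFrozenCase c conns queries hfrozen
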